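-- pv_equiv track=rewrite | github.com/klimarichard/project_euler | src/problems_76-100/78_coin_partitions.py | find_coin_partitions
-- ===== SOURCE A (Python) =====
-- def find_coin_partitions(k):
--     """
--     Finds first amount of coins, for which the number of ways it can be
--     separated into piles is divisible by given integer.
--     :param k: divisor
--     :return: first number of coins with p(n) divisible by k
--     """
--     # we can use the generator function and pentagonal number theorem
--
--     # list of moduli of p(n) for n
--     mods = [1]
--     n = 1
--     flag = True
--
--     while flag:
--         i = 0
--         # pentagonal number
--         p = 1
--         mods.append(0)
--
--         while p <= n:
--             if i % 4 > 1:
--                 sign = -1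
--             else:
--                 sign = 1
--
--             mods[n] += sign * mods[n - p]
--             mods[n] %= k
--             i += 1
--
--             if i % 2 == 0:
--                 j = i // 2 + 1
--             else:
--                 j = -((i // 2) + 1)
--             # next pentagonal number
--             p = j * (3 * j - 1) // 2
--
--         if mods[n] == 0:
--             flag = False
--         else:
--             n += 1
--
--     return n
-- ===== SOURCE B (Python) =====
-- def _euler_poly(N, k):
--     # coefficients mod k of Euler's polynomial prod_(i>=1) (1 - x^i) truncated
--     # at x^N: 1 at 0 and (-1)^j at the generalized pentagonal numbers
--     # j(3j-1)/2 and j(3j+1)/2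
--     e = [0] * (N + 1)
--     e[0] = 1 % k
--     j = 1
--     while j * (3 * j - 1) // 2 <= N:
--         s = -1 if j % 2 else 1
--         g = j * (3 * j - 1) // 2
--         e[g] = (e[g] + s) % k
--         if g + j <= N:
--             e[g + j] = (e[g + j] + s) % k
--         j += 1
--     return e
--
--
-- def _pack(r, lo, hi, B):
--     # sum of r[i] << (B * (i - lo)) over lo <= i < hi, by divide and conquer
--     if hi - lo == 1:
--         return r[lo]
--     mid = (lo + hi) // 2
--     return _pack(r, lo, mid, B) + (_pack(r, mid, hi, B) << (B * (mid - lo)))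
--
--
-- def _unpack(q, n, B):
--     # the n B-bit digits of q (0 <= q < 1 << (B * n)), by divide and conquer
--     if n == 1:
--         return [q]
--     mid = n // 2
--     return _unpack(q & ((1 << (B * mid)) - 1), mid, B) + _unpack(q >> (B * mid), n - mid, B)
--
--
-- def _mul_trunc(a, b, m, k):
--     # product of the polynomials a and b truncated to m coefficients, mod k,
--     # by Kronecker substitution: pack both into one integer with B-bit limbs
--     # wide enough that limbs never overflow, multiply as plain integers
--     # (Python's fast big-int multiplication), and read the limbs back off
--     K = k if k > 0 else -k
--     bound = max(len(a), len(b)) * (K - 1) * (K - 1)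
--     B = 1
--     while (1 << B) <= bound:
--         B += 1
--     pa = _pack([x % K for x in a], 0, len(a), B)
--     pb = _pack([x % K for x in b], 0, len(b), B)
--     prod = (pa * pb) & ((1 << (B * m)) - 1)
--     return [d % k for d in _unpack(prod, m, B)]
--
--
-- def _series_inverse(e, N, k):
--     # Newton iteration for the inverse power series of e (e[0] must be a unit,
--     # here e[0] == 1 mod k): precision doubles each round via
--     # I_{2m} = I_m * (2 - e * I_m) mod x^{2m}
--     inv = [1 % k]
--     m = 1
--     while m <= N:
--         m2 = min(2 * m, N + 1)
--         c = _mul_trunc(e, inv, m2, k)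
--         t = [(-x) % k for x in c]
--         t[0] = (2 - c[0]) % k
--         inv = _mul_trunc(t, inv, m2, k)
--         m = m2
--     return inv
--
--
-- def find_coin_partitions(k):
--     """
--     Finds first amount of coins, for which the number of ways it can be
--     separated into piles is divisible by given integer.
--     :param k: divisor
--     :return: first number of coins with p(n) divisible by k
--     """
--     # The partition generating function is the inverse of Euler's polynomial,
--     # so compute that inverse mod k by Newton iteration on truncated
--     # polynomials and scan it for the first zero coefficient, doubling the
--     # bound N until one is found.
--     N = 16
--     while True:
--         inv = _series_inverse(_euler_poly(N, k), N, k)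
--         for n in range(1, N + 1):
--             if inv[n] == 0:
--                 return n
--         N *= 2
-- ===== Notes on version B (the rewrite author's own statement) =====
-- stated objective: alternative
-- what changed: Instead of extending A's termwise pentagonal recurrence one coefficient at a time, B builds Euler's polynomial prod(1-x^i) mod k and computes the partition series as its multiplicative inverse by Newton iteration on truncated polynomials (I <- I*(2-E*I), precision doubling), with each truncated product done by Kronecker substitution (coefficients packed into one big integer, one big-integer multiplication, digits unpacked); it then scans the coefficient array for the first zero, doubling the bound N until one appears; Pre_ excludes only k = 0, where A raises ZeroDivisionError (as does B).
-- outside the precondition, e.g. on find_coin_partitions(0): A raises ZeroDivisionError, B raises ZeroDivisionError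
import Mathlib
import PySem

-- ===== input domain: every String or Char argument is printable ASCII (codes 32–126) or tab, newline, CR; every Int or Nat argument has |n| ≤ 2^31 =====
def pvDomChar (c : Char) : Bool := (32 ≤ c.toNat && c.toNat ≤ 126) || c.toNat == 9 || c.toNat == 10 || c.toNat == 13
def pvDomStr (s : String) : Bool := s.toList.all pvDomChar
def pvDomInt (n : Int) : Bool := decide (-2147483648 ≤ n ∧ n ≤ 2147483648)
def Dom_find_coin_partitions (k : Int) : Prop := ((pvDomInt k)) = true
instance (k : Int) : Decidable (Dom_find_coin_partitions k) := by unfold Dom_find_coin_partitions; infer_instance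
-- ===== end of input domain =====

-- B replaces A's termwise pentagonal recurrence by a different algorithm: it builds Euler's
-- polynomial prod (1 - x^i) mod k and computes the partition series as its multiplicative
-- inverse by Newton iteration on truncated polynomials (products by Kronecker substitution:
-- pack, one big-integer multiplication, unpack), then scans for the first zero coefficient,
-- doubling the bound N until one appears.  Objective: alternative.
-- Both Pythons loop until the answer is found; the ports bound both searches by the same cutoff
-- 2^24 (port A: 2^24 outer steps; port B: bound doubling 16,32,…,2^24), a fuel guard only.
-- Python's list `mods` is ported as `Array Int`; every index used is in range, so getD/set! are exact.

-- ===== PORT A =====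
-- the inner `while p <= n` loop: state (i, p, mods) exactly as in A
def pyInnerA (k n : Int) (i p : Int) (mods : Array Int) : Nat → Array Int
  | 0 => mods
  | fuel+1 =>
    if p ≤ n then
      let sign : Int := if PySem.Int.mod i 4 > 1 then -1 else 1
      let mods1 := mods.set! n.toNat (mods.getD n.toNat 0 + sign * mods.getD (n - p).toNat 0)
      let mods2 := mods1.set! n.toNat (PySem.Int.mod (mods1.getD n.toNat 0) k)
      let i1 := i + 1
      let j : Int := if PySem.Int.mod i1 2 = 0 then PySem.Int.floordiv i1 2 + 1
                     else -(PySem.Int.floordiv i1 2 + 1)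
      pyInnerA k n i1 (PySem.Int.floordiv (j * (3 * j - 1)) 2) mods2 fuel
    else mods

-- the outer `while flag` loop: append 0, run the inner loop, test mods[n] == 0
def pyOuterA (k n : Int) (mods : Array Int) : Nat → Int
  | 0 => n
  | fuel+1 =>
    let mods2 := pyInnerA k n 0 1 (mods.push 0) (n.toNat + 1)
    if mods2.getD n.toNat 0 = 0 then n else pyOuterA k (n + 1) mods2 fuel

def find_coin_partitions (k : Int) : Int := pyOuterA k 1 #[1] 16777216

-- ===== PORT B =====
-- _euler_poly: scatter the signed generalized pentagonal coefficients of prod (1 - x^i)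
def eulerLoop (N : Nat) (k : Int) (e : Array Int) (j : Nat) : Nat → Array Int
  | 0 => e
  | fuel+1 =>
    if j * (3 * j - 1) / 2 ≤ N then
      let s : Int := if j % 2 = 1 then -1 else 1
      let g := j * (3 * j - 1) / 2
      let e1 := e.set! g (PySem.Int.mod (e.getD g 0 + s) k)
      let e2 := if g + j ≤ N then e1.set! (g + j) (PySem.Int.mod (e1.getD (g + j) 0 + s) k) else e1
      eulerLoop N k e2 (j + 1) fuel
    else e

def eulerPoly (N : Nat) (k : Int) : Array Int :=
  eulerLoop N k ((Array.replicate (N + 1) 0).set! 0 (PySem.Int.mod 1 k)) 1 (N + 1)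

-- _pack: sum of r[i] << (B*(i-lo)) over lo <= i < hi, by divide and conquer
def packDC (r : Array Int) (B : Nat) (lo hi : Nat) : Nat → Int
  | 0 => 0
  | fuel+1 =>
    if hi - lo = 1 then r.getD lo 0
    else
      let mid := (lo + hi) / 2
      packDC r B lo mid fuel + packDC r B mid hi fuel * 2 ^ (B * (mid - lo))

-- _unpack: the n B-bit digits of q, by divide and conquer (>> and & are // and % by 2^s)
def unpackDC (B : Nat) (q : Int) (n : Nat) : Nat → List Int
  | 0 => []
  | fuel+1 =>
    if n = 1 then [q]
    else
      let mid := n / 2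
      unpackDC B (PySem.Int.mod q (2 ^ (B * mid))) mid fuel ++
        unpackDC B (PySem.Int.floordiv q (2 ^ (B * mid))) (n - mid) fuel

-- the `while (1 << B) <= bound` loop choosing the limb width
def bitLoop (bound : Int) : Nat → Nat → Nat
  | B, 0 => B
  | B, fuel+1 => if 2 ^ B ≤ bound then bitLoop bound (B + 1) fuel else B

-- _mul_trunc by Kronecker substitution: pack, one big multiplication, unpack
def mulTrunc (a b : Array Int) (m : Nat) (k : Int) : Array Int :=
  let K := if k > 0 then k else -k
  let bound := (max a.size b.size : Int) * (K - 1) * (K - 1)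
  let B := bitLoop bound 1 (bound.toNat + 2)
  let pa := packDC (a.map fun x => PySem.Int.mod x K) B 0 a.size a.size
  let pb := packDC (b.map fun x => PySem.Int.mod x K) B 0 b.size b.size
  let prod := PySem.Int.mod (pa * pb) (2 ^ (B * m))
  ((unpackDC B prod m m).map fun d => PySem.Int.mod d k).toArray

-- _series_inverse: Newton iteration, precision m doubling up to N+1
def newtonLoop (e : Array Int) (N : Nat) (k : Int) (inv : Array Int) (m : Nat) : Nat → Array Int
  | 0 => inv
  | fuel+1 =>
    if m ≤ N then
      let m2 := min (2 * m) (N + 1)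
      let c := mulTrunc e inv m2 k
      let t := c.map (fun x => PySem.Int.mod (-x) k)
      let t2 := t.set! 0 (PySem.Int.mod (2 - c.getD 0 0) k)
      newtonLoop e N k (mulTrunc t2 inv m2 k) m2 fuel
    else inv

def seriesInverse (e : Array Int) (N : Nat) (k : Int) : Array Int :=
  newtonLoop e N k #[PySem.Int.mod 1 k] 1 (N + 1)

-- the `for n in range(1, N+1)` scan
def altScan (inv : Array Int) (n : Nat) : Nat → Option Nat
  | 0 => none
  | r+1 => if inv.getD n 0 = 0 then some n else altScan inv (n + 1) r

-- the doubling `while True` loop; the fuel-0 value (N/2)+1 aligns with port A's fuel guard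
def altLoop (k : Int) (N : Nat) : Nat → Int
  | 0 => ((N / 2 : Nat) : Int) + 1
  | fuel+1 =>
    let inv := seriesInverse (eulerPoly N k) N k
    match altScan inv 1 N with
    | some n => (n : Int)
    | none => altLoop k (2 * N) fuel

def find_coin_partitions_alt (k : Int) : Int := altLoop k 16 21

-- ===== PRECONDITION & SPEC =====
-- Pre_ excludes exactly k = 0, on which Python A raises ZeroDivisionError at `mods[n] %= k`.
def Pre_find_coin_partitions (k : Int) : Prop := k ≠ 0
instance (k : Int) : Decidable (Pre_find_coin_partitions k) := by unfold Pre_find_coin_partitions; infer_instance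
def pvWitness_find_coin_partitions : Int := 7
def Spec_find_coin_partitions (k : Int) (out : Int) : Prop := out = find_coin_partitions_alt k
instance (k : Int) (out : Int) : Decidable (Spec_find_coin_partitions k out) := by unfold Spec_find_coin_partitions; infer_instance

-- ===== CLAIM (what is proved, stated in full; the proofs are below) =====
def Claim_equal_find_coin_partitions : Prop := ∀ (k : Int), Dom_find_coin_partitions k → Pre_find_coin_partitions k → Spec_find_coin_partitions k (find_coin_partitions k)

-- ===== LEMMAS AND PROOFS =====

-- ---------- Python % toolkit ----------
theorem pv_mod_add_mul (x q k : Int) (hk : k ≠ 0) :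
    PySem.Int.mod (x + q * k) k = PySem.Int.mod x k := by
  have h1 := PySem.Int.floordiv_mul_add_mod (x + q * k) k
  have h2 := PySem.Int.floordiv_mul_add_mod x k
  set f1 := PySem.Int.floordiv (x + q * k) k
  set f2 := PySem.Int.floordiv x k
  have hd : k ∣ (PySem.Int.mod (x + q * k) k - PySem.Int.mod x k) :=
    ⟨q - f1 + f2, by linarith [h1, h2, mul_sub k q f1, mul_add k (q - f1) f2, mul_comm k q, mul_comm k f1, mul_comm k f2]⟩
  have hb : |PySem.Int.mod (x + q * k) k - PySem.Int.mod x k| < |k| := by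
    rcases lt_or_gt_of_ne hk with hneg | hpos
    · have b1 := PySem.Int.mod_neg_bounds (x + q * k) hneg
      have b2 := PySem.Int.mod_neg_bounds x hneg
      rw [abs_of_neg hneg, abs_lt]
      constructor <;> omega
    · have b1l := PySem.Int.mod_nonneg (x + q * k) hpos
      have b1r := PySem.Int.mod_lt (x + q * k) hpos
      have b2l := PySem.Int.mod_nonneg x hpos
      have b2r := PySem.Int.mod_lt x hpos
      rw [abs_of_pos hpos, abs_lt]
      constructor <;> omega
  have h0 := Int.eq_zero_of_abs_lt_dvd ((abs_dvd k _).mpr hd) hb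
  linarith

theorem pv_mod_eq_of_modeq (k x y : Int) (hk : k ≠ 0) (h : x ≡ y [ZMOD k]) :
    PySem.Int.mod x k = PySem.Int.mod y k := by
  obtain ⟨q, hq⟩ := Int.ModEq.dvd h
  have hx : x = y + (-q) * k := by rw [neg_mul, mul_comm q k]; omega
  rw [hx, pv_mod_add_mul y (-q) k hk]

theorem pv_mod_modeq (k x : Int) (hk : k ≠ 0) : PySem.Int.mod x k ≡ x [ZMOD k] := by
  have h := PySem.Int.floordiv_mul_add_mod x k
  have : k ∣ x - PySem.Int.mod x k := ⟨PySem.Int.floordiv x k, by linarith [mul_comm (PySem.Int.floordiv x k) k]⟩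
  exact Int.modEq_iff_dvd.2 this

-- canonical residues (the values A and B actually store)
def pvCanon (k x : Int) : Prop := PySem.Int.mod x k = x

theorem pv_canon_mod (k x : Int) (hk : k ≠ 0) : pvCanon k (PySem.Int.mod x k) :=
  pv_mod_eq_of_modeq k _ x hk (pv_mod_modeq k x hk)

theorem pv_canon_zero (k : Int) (hk : k ≠ 0) : pvCanon k 0 := by
  have h := PySem.Int.floordiv_mul_add_mod 0 k
  rcases lt_or_gt_of_ne hk with hneg | hpos
  · have b := PySem.Int.mod_neg_bounds 0 hneg
    have hd : k ∣ PySem.Int.mod 0 k := ⟨-(PySem.Int.floordiv 0 k), by linarith [mul_comm k (PySem.Int.floordiv 0 k), neg_mul k (PySem.Int.floordiv 0 k)]⟩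
    exact Int.eq_zero_of_abs_lt_dvd ((abs_dvd k _).mpr hd) (by rw [abs_of_neg hneg, abs_lt]; constructor <;> omega)
  · have bl := PySem.Int.mod_nonneg 0 hpos
    have br := PySem.Int.mod_lt 0 hpos
    have hd : k ∣ PySem.Int.mod 0 k := ⟨-(PySem.Int.floordiv 0 k), by linarith [mul_comm k (PySem.Int.floordiv 0 k), neg_mul k (PySem.Int.floordiv 0 k)]⟩
    exact Int.eq_zero_of_abs_lt_dvd ((abs_dvd k _).mpr hd) (by rw [abs_of_pos hpos, abs_lt]; constructor <;> omega)

theorem pv_canon_eq (k x y : Int) (hk : k ≠ 0) (hx : pvCanon k x) (hy : pvCanon k y)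
    (h : x ≡ y [ZMOD k]) : x = y := by
  rw [← hx, ← hy]; exact pv_mod_eq_of_modeq k x y hk h

theorem pv_modeq_sum {k : Int} {s : Finset ℕ} {f g : ℕ → Int}
    (h : ∀ i ∈ s, f i ≡ g i [ZMOD k]) : (∑ i ∈ s, f i) ≡ (∑ i ∈ s, g i) [ZMOD k] := by
  unfold Int.ModEq
  rw [Finset.sum_int_mod (n := k) (f := f), Finset.sum_int_mod (n := k) (f := g)]
  exact congrArg (· % k) (Finset.sum_congr rfl h)

-- ---------- the abstract sequences ----------
-- generalized pentagonal numbers and the coefficients of Euler's series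
def gp (j : Nat) : Nat := j * (3 * j - 1) / 2
def esign (j : Nat) : Int := if j % 2 = 0 then 1 else -1
def eu (m : Nat) : Int :=
  (if m = 0 then 1 else 0) +
    ∑ j ∈ Finset.Icc 1 m, esign j * ((if gp j = m then 1 else 0) + (if gp j + j = m then 1 else 0))

-- convolution of integer sequences (= power-series multiplication)
def conv (f g : Nat → Int) (n : Nat) : Int := ∑ i ∈ Finset.range (n + 1), f i * g (n - i)

-- the canonical sequence of residues p(n) mod k, newest first
def Mlist (k : Int) : Nat → List Int
  | 0 => [1]
  | n+1 =>
    let prev := Mlist k n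
    PySem.Int.mod (- ∑ m ∈ Finset.Icc 1 (n + 1), eu m * prev.getD (m - 1) 0) k :: prev

def Mfun (k : Int) (n : Nat) : Int := (Mlist k n).getD 0 0

-- ---------- facts about gp / eu ----------
theorem gp_two_mul (j : Nat) : 2 * gp j = j * (3 * j - 1) := by
  have h2 : 2 ∣ j * (3 * j - 1) := by
    rcases Nat.even_or_odd j with he | ho
    · exact Dvd.dvd.mul_right he.two_dvd _
    · obtain ⟨t, rfl⟩ := ho
      have h : 3 * (2 * t + 1) - 1 = 2 * (3 * t + 1) := by omega
      rw [h]
      exact Dvd.dvd.mul_left ⟨3 * t + 1, rfl⟩ _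
  obtain ⟨c, hc⟩ := h2
  unfold gp
  omega

theorem gp_succ (j : Nat) (hj : 1 ≤ j) : gp (j + 1) = gp j + 3 * j + 1 := by
  obtain ⟨i, rfl⟩ : ∃ i, j = i + 1 := ⟨j - 1, by omega⟩
  have a := gp_two_mul (i + 1)
  have b := gp_two_mul (i + 1 + 1)
  have e1 : 3 * (i + 1) - 1 = 3 * i + 2 := by omega
  have e2 : 3 * (i + 1 + 1) - 1 = 3 * i + 5 := by omega
  rw [e1] at a
  rw [e2] at b
  have key : (i + 1 + 1) * (3 * i + 5) = (i + 1) * (3 * i + 2) + 6 * (i + 1) + 2 := by ring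
  omega

theorem gp_ge_self (j : Nat) (hj : 1 ≤ j) : j ≤ gp j := by
  have a := gp_two_mul j
  have h : j * 2 ≤ j * (3 * j - 1) := Nat.mul_le_mul_left j (by omega)
  omega

theorem gp_mono (i j : Nat) (h1 : 1 ≤ i) (h : i ≤ j) : gp i ≤ gp j := by
  induction j with
  | zero => omega
  | succ n ih =>
    rcases Nat.lt_or_ge i (n + 1) with hlt | hge
    · have hn : gp i ≤ gp n := ih (by omega)
      have := gp_succ n (by omega)
      omega
    · have h2 : i = n + 1 := by omega
      rw [h2]

-- ---------- Mfun facts ----------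
theorem Mlist_getD (k : Int) (n t : Nat) : (Mlist k (n + t)).getD t 0 = Mfun k n := by
  induction t with
  | zero => rfl
  | succ t ih =>
    have h : n + (t + 1) = (n + t) + 1 := by omega
    rw [h]
    show (Mlist k ((n + t) + 1)).getD (t + 1) 0 = Mfun k n
    rw [Mlist]
    simpa using ih

theorem Mfun_zero (k : Int) : Mfun k 0 = 1 := rfl

theorem Mfun_succ (k : Int) (n : Nat) :
    Mfun k (n + 1) =
      PySem.Int.mod (- ∑ m ∈ Finset.Icc 1 (n + 1), eu m * Mfun k (n + 1 - m)) k := by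
  show (Mlist k (n + 1)).getD 0 0 = _
  rw [Mlist]
  simp only [List.getD_cons_zero]
  congr 2
  refine Finset.sum_congr rfl (fun m hm => ?_)
  simp only [Finset.mem_Icc] at hm
  congr 1
  have h : n + 1 - m + (m - 1) = n := by omega
  calc (Mlist k n).getD (m - 1) 0 = (Mlist k ((n + 1 - m) + (m - 1))).getD (m - 1) 0 := by rw [h]
    _ = Mfun k (n + 1 - m) := Mlist_getD k _ _

theorem Mfun_canon (k : Int) (n : Nat) (hk : k ≠ 0) (hn : 1 ≤ n) : pvCanon k (Mfun k n) := by
  obtain ⟨m, rfl⟩ : ∃ m, n = m + 1 := ⟨n - 1, by omega⟩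
  rw [Mfun_succ]
  exact pv_canon_mod k _ hk

theorem range_succ_insert (n : Nat) : Finset.range (n + 1) = insert 0 (Finset.Icc 1 n) := by
  ext i
  simp only [Finset.mem_range, Finset.mem_insert, Finset.mem_Icc]
  omega

theorem eu_zero : eu 0 = 1 := by simp [eu]

theorem pv_unique (k : Int) (hk : k ≠ 0) (N : Nat) (X : Nat → Int)
    (h0 : X 0 ≡ 1 [ZMOD k])
    (hc : ∀ n, 1 ≤ n → n ≤ N → conv eu X n ≡ 0 [ZMOD k])
    (hcan : ∀ n, 1 ≤ n → n ≤ N → pvCanon k (X n)) :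
    ∀ n, 1 ≤ n → n ≤ N → X n = Mfun k n := by
  intro n
  induction n using Nat.strong_induction_on with
  | _ n IH =>
  intro hn hN
  obtain ⟨m, rfl⟩ : ∃ m, n = m + 1 := ⟨n - 1, by omega⟩
  have hdec := hc (m + 1) hn hN
  unfold conv at hdec
  rw [range_succ_insert, Finset.sum_insert (by simp)] at hdec
  simp only [eu_zero, one_mul, Nat.sub_zero] at hdec
  set S := ∑ i ∈ Finset.Icc 1 (m + 1), eu i * X (m + 1 - i) with hS
  have hXn : X (m + 1) ≡ -S [ZMOD k] := by
    have := Int.ModEq.sub hdec (Int.ModEq.refl S)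
    simpa using this
  have hSM : S ≡ ∑ i ∈ Finset.Icc 1 (m + 1), eu i * Mfun k (m + 1 - i) [ZMOD k] := by
    apply pv_modeq_sum
    intro i hi
    simp only [Finset.mem_Icc] at hi
    apply Int.ModEq.mul Int.ModEq.rfl
    rcases Nat.eq_zero_or_pos (m + 1 - i) with hz | hpos
    · rw [hz, Mfun_zero]; exact h0
    · rw [IH (m + 1 - i) (by omega) (by omega) (by omega)]
  have hM : Mfun k (m + 1) ≡ -S [ZMOD k] := by
    rw [Mfun_succ]
    calc PySem.Int.mod (- ∑ i ∈ Finset.Icc 1 (m + 1), eu i * Mfun k (m + 1 - i)) k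
        ≡ - ∑ i ∈ Finset.Icc 1 (m + 1), eu i * Mfun k (m + 1 - i) [ZMOD k] := pv_mod_modeq k _ hk
      _ ≡ -S [ZMOD k] := (Int.ModEq.neg hSM).symm
  exact pv_canon_eq k _ _ hk (hcan _ hn hN) (Mfun_canon k _ hk hn)
    (hXn.trans hM.symm)


-- ---------- convolution and power series ----------
theorem conv_coeff (f g : Nat → Int) (n : Nat) :
    conv f g n = PowerSeries.coeff n (PowerSeries.mk f * PowerSeries.mk g) := by
  unfold conv
  rw [PowerSeries.coeff_mul, Finset.Nat.sum_antidiagonal_eq_sum_range_succ_mk]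
  simp

theorem mk_conv (f g : Nat → Int) :
    PowerSeries.mk (conv f g) = PowerSeries.mk f * PowerSeries.mk g := by
  ext n
  simp [conv_coeff]

theorem conv_modeq {k : Int} (f f' g g' : Nat → Int) (n : Nat)
    (hf : ∀ i ≤ n, f i ≡ f' i [ZMOD k]) (hg : ∀ i ≤ n, g i ≡ g' i [ZMOD k]) :
    conv f g n ≡ conv f' g' n [ZMOD k] := by
  apply pv_modeq_sum
  intro i hi
  simp only [Finset.mem_range] at hi
  exact Int.ModEq.mul (hf i (by omega)) (hg (n - i) (by omega))

-- the Kronecker delta sequence (coefficients of the power series 1)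
def dlt (n : Nat) : Int := if n = 0 then 1 else 0

-- associativity transfer: E * (I * T) has the same coefficients as (E * I) * T
theorem conv_assoc_comm (e i t : Nat → Int) (n : Nat) :
    conv e (conv t i) n = conv (conv e i) t n := by
  rw [conv_coeff, conv_coeff, mk_conv, mk_conv]
  ring_nf

-- the Newton step: if cc agrees with delta below m, then cc*(2*1 - cc) agrees below 2m
theorem newton_key (k : Int) (cc : Nat → Int) (m n : Nat) (hm : 1 ≤ m) (hn : n < 2 * m)
    (hc : ∀ i < m, cc i ≡ dlt i [ZMOD k]) :
    conv cc (fun i => 2 * dlt i - cc i) n ≡ dlt n [ZMOD k] := by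
  have hy : PowerSeries.mk (fun i => 2 * dlt i - cc i) =
      2 * 1 - PowerSeries.mk cc := by
    ext j
    rw [show (2 : PowerSeries ℤ) = 1 + 1 by norm_num]
    simp [dlt, PowerSeries.coeff_one]
    split <;> norm_num
  have hid : PowerSeries.mk cc * (2 * 1 - PowerSeries.mk cc) =
      1 - (1 - PowerSeries.mk cc) * (1 - PowerSeries.mk cc) := by ring
  have hyy : (1 : PowerSeries ℤ) - PowerSeries.mk cc =
      PowerSeries.mk (fun i => dlt i - cc i) := by
    ext j
    simp [dlt, PowerSeries.coeff_one]
  have hcoeff : conv cc (fun i => 2 * dlt i - cc i) n =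
      dlt n - conv (fun i => dlt i - cc i) (fun i => dlt i - cc i) n := by
    rw [conv_coeff, conv_coeff, hy, hid, hyy]
    have : PowerSeries.coeff n ((1 : PowerSeries ℤ) -
        PowerSeries.mk (fun i => dlt i - cc i) * PowerSeries.mk (fun i => dlt i - cc i)) =
        PowerSeries.coeff n (1 : PowerSeries ℤ) -
        PowerSeries.coeff n (PowerSeries.mk (fun i => dlt i - cc i) * PowerSeries.mk (fun i => dlt i - cc i)) := by
      simp
    rw [this, PowerSeries.coeff_one]
    simp [dlt]
  rw [hcoeff]
  have hzero : conv (fun i => dlt i - cc i) (fun i => dlt i - cc i) n ≡ 0 [ZMOD k] := by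
    have : (0 : Int) = ∑ i ∈ Finset.range (n + 1), (0 : Int) := by simp
    rw [this]
    apply pv_modeq_sum
    intro i hi
    simp only [Finset.mem_range] at hi
    rcases Nat.lt_or_ge i m with him | him
    · have h1 : dlt i - cc i ≡ 0 [ZMOD k] := by
        have h := Int.ModEq.sub (Int.ModEq.refl (dlt i)) (hc i him)
        simpa using h
      calc (dlt i - cc i) * (dlt (n - i) - cc (n - i))
          ≡ 0 * (dlt (n - i) - cc (n - i)) [ZMOD k] := Int.ModEq.mul h1 Int.ModEq.rfl
        _ = 0 := by ring
    · have hnm : n - i < m := by omega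
      have h1 : dlt (n - i) - cc (n - i) ≡ 0 [ZMOD k] := by
        have h := Int.ModEq.sub (Int.ModEq.refl (dlt (n - i))) (hc (n - i) hnm)
        simpa using h
      calc (dlt i - cc i) * (dlt (n - i) - cc (n - i))
          ≡ (dlt i - cc i) * 0 [ZMOD k] := Int.ModEq.mul Int.ModEq.rfl h1
        _ = 0 := by ring
  calc dlt n - conv (fun i => dlt i - cc i) (fun i => dlt i - cc i) n
      ≡ dlt n - 0 [ZMOD k] := Int.ModEq.sub Int.ModEq.rfl hzero
    _ = dlt n := by ring


-- ---------- array helpers ----------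
theorem arr_size_set (a : Array Int) (i : Nat) (v : Int) : (a.set! i v).size = a.size := by
  simp [Array.set!]

theorem arr_getD_set_self (a : Array Int) (i : Nat) (v : Int) (h : i < a.size) :
    (a.set! i v).getD i 0 = v := by
  simp [Array.set!, Array.getD, h]

theorem arr_getD_set_ne (a : Array Int) (i n : Nat) (v : Int) (h : n ≠ i) :
    (a.set! i v).getD n 0 = a.getD n 0 := by
  by_cases hn : n < a.size
  · simp [Array.set!, Array.getD, hn, Ne.symm h]
  · simp [Array.set!, Array.getD, hn]

theorem arr_getD_oob (a : Array Int) (n : Nat) (h : a.size ≤ n) : a.getD n 0 = 0 := by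
  simp [Array.getD, Nat.not_lt.mpr h]

theorem arr_getD_replicate (n m : Nat) (h : m < n) : (Array.replicate n (0:Int)).getD m 0 = 0 := by
  simp [Array.getD, h]

-- zero-extended view of an array as a sequence
def ahat (a : Array Int) (i : Nat) : Int := a.getD i 0

-- ---------- _mul_trunc computes the convolution (Kronecker substitution) ----------
theorem packDC_spec (r : Array Int) (B : Nat) :
    ∀ (fuel lo hi : Nat), 1 ≤ hi - lo → hi - lo ≤ fuel →
      packDC r B lo hi fuel = ∑ i ∈ Finset.range (hi - lo), ahat r (lo + i) * 2 ^ (B * i) := by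
  intro fuel
  induction fuel with
  | zero => intro lo hi h1 h2; omega
  | succ fuel IH =>
    intro lo hi h1 h2
    by_cases hone : hi - lo = 1
    · rw [packDC, if_pos hone, hone, Finset.sum_range_one]
      simp [ahat]
    · have h2' : 2 ≤ hi - lo := by omega
      set mid := (lo + hi) / 2 with hmid
      have hstep : packDC r B lo hi (fuel + 1)
          = packDC r B lo mid fuel + packDC r B mid hi fuel * 2 ^ (B * (mid - lo)) := by
        rw [packDC, if_neg hone]
      rw [hstep]
      have hm1 : 1 ≤ mid - lo := by omega
      have hm2 : 1 ≤ hi - mid := by omega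
      rw [IH lo mid hm1 (by omega), IH mid hi hm2 (by omega)]
      have hsplit : hi - lo = (mid - lo) + (hi - mid) := by omega
      rw [hsplit, Finset.sum_range_add]
      congr 1
      rw [Finset.sum_mul]
      apply Finset.sum_congr rfl
      intro i _
      have e1 : lo + (mid - lo + i) = mid + i := by omega
      have e2 : B * (mid - lo + i) = B * i + B * (mid - lo) := by ring
      rw [e1, e2, pow_add]
      ring

theorem digsum_nonneg_lt (base : Int) (hbase : 0 < base) (d : Nat → Int) :
    ∀ m, (∀ n < m, 0 ≤ d n ∧ d n < base) →
      0 ≤ (∑ n ∈ Finset.range m, d n * base ^ n) ∧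
      (∑ n ∈ Finset.range m, d n * base ^ n) < base ^ m := by
  intro m
  induction m with
  | zero => intro _; simp
  | succ m IH =>
    intro hd
    obtain ⟨h0, h1⟩ := IH (fun n hn => hd n (by omega))
    obtain ⟨hd0, hd1⟩ := hd m (by omega)
    rw [Finset.sum_range_succ]
    have hp : (0:Int) < base ^ m := pow_pos hbase m
    constructor
    · have h2 : 0 ≤ d m * base ^ m := mul_nonneg hd0 (le_of_lt hp)
      omega
    · have h2 : d m * base ^ m ≤ (base - 1) * base ^ m :=
        mul_le_mul_of_nonneg_right (by omega) (le_of_lt hp)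
      have hr : (base - 1) * base ^ m + base ^ m = base ^ (m + 1) := by rw [pow_succ]; ring
      omega

theorem digsum_split (base : Int) (d : Nat → Int) (m i : Nat) (him : i ≤ m) :
    (∑ n ∈ Finset.range m, d n * base ^ n)
      = (∑ n ∈ Finset.range i, d n * base ^ n)
        + (∑ j ∈ Finset.range (m - i), d (i + j) * base ^ j) * base ^ i := by
  have hsplit : m = i + (m - i) := by omega
  conv_lhs => rw [hsplit]
  rw [Finset.sum_range_add]
  congr 1
  rw [Finset.sum_mul]
  apply Finset.sum_congr rfl
  intro j _
  rw [pow_add]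
  ring

theorem digsum_extract (base : Int) (hbase : 0 < base) (d : Nat → Int) (m i : Nat)
    (hd : ∀ n < m, 0 ≤ d n ∧ d n < base) (him : i < m) :
    PySem.Int.mod (PySem.Int.floordiv (∑ n ∈ Finset.range m, d n * base ^ n) (base ^ i)) base
      = d i := by
  rw [digsum_split base d m i (by omega)]
  set low := ∑ n ∈ Finset.range i, d n * base ^ n with hlow
  set T := ∑ j ∈ Finset.range (m - i), d (i + j) * base ^ j with hT
  obtain ⟨hl0, hl1⟩ := digsum_nonneg_lt base hbase d i (fun n hn => hd n (by omega))
  have hpi : (0:Int) < base ^ i := pow_pos hbase i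
  have hdiv : PySem.Int.floordiv (low + T * base ^ i) (base ^ i) = T := by
    rw [PySem.Int.floordiv_eq_ediv_of_pos hpi,
      Int.add_mul_ediv_right low T (ne_of_gt hpi),
      Int.ediv_eq_zero_of_lt hl0 hl1]
    omega
  rw [hdiv]
  obtain ⟨t, ht⟩ : ∃ t, m - i = t + 1 := ⟨m - i - 1, by omega⟩
  have hT2 : T = d i + (∑ j ∈ Finset.range t, d (i + 1 + j) * base ^ j) * base := by
    rw [hT, ht, Finset.sum_range_succ', Finset.sum_mul]
    have h0 : d (i + 0) * base ^ 0 = d i := by simp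
    have hterm : ∀ j ∈ Finset.range t, d (i + (j + 1)) * base ^ (j + 1)
        = d (i + 1 + j) * base ^ j * base := by
      intro j _
      rw [show i + (j + 1) = i + 1 + j from by omega, pow_succ]
      ring
    rw [Finset.sum_congr rfl hterm, h0]
    ring
  rw [hT2, pv_mod_add_mul (d i) _ base (ne_of_gt hbase)]
  rw [PySem.Int.mod_eq_emod_of_pos hbase]
  exact Int.emod_eq_of_lt (hd i him).1 (hd i him).2

theorem unpackDC_spec (B : Nat) :
    ∀ (fuel n : Nat) (q : Int), 1 ≤ n → n ≤ fuel → 0 ≤ q → q < (2:Int) ^ (B * n) →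
      (unpackDC B q n fuel).length = n ∧
      ∀ i < n, (unpackDC B q n fuel).getD i 0
        = PySem.Int.mod (PySem.Int.floordiv q ((2:Int) ^ (B * i))) ((2:Int) ^ B) := by
  intro fuel
  induction fuel with
  | zero => intro n q h1 h2 _ _; omega
  | succ fuel IH =>
    intro n q h1 h2 hq0 hq1
    have hb2 : (0:Int) < 2 ^ B := pow_pos (by norm_num) B
    by_cases hone : n = 1
    · subst hone
      rw [unpackDC, if_pos rfl]
      refine ⟨rfl, ?_⟩
      intro i hi
      have h0 : i = 0 := by omega
      subst h0
      show q = _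
      rw [show B * 0 = 0 from by ring, pow_zero,
        show PySem.Int.floordiv q 1 = q from by
          rw [PySem.Int.floordiv_eq_ediv_of_pos (by norm_num)]; omega,
        PySem.Int.mod_eq_emod_of_pos hb2,
        Int.emod_eq_of_lt hq0 (by rw [show B * 1 = B from by ring] at hq1; exact hq1)]
    · set mid := n / 2 with hmiddef
      have hstep : unpackDC B q n (fuel + 1)
          = unpackDC B (PySem.Int.mod q (2 ^ (B * mid))) mid fuel ++
            unpackDC B (PySem.Int.floordiv q (2 ^ (B * mid))) (n - mid) fuel := by
        rw [unpackDC, if_neg hone]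
      rw [hstep]
      have hmid1 : 1 ≤ mid := by omega
      have hmid2 : mid < n := by omega
      have hpm0 : (0:Int) < 2 ^ (B * mid) := pow_pos (by norm_num) _
      set lo := PySem.Int.mod q (2 ^ (B * mid)) with hlodef
      set hi := PySem.Int.floordiv q (2 ^ (B * mid)) with hhidef
      have hlo0 : 0 ≤ lo := PySem.Int.mod_nonneg q hpm0
      have hlo1 : lo < 2 ^ (B * mid) := PySem.Int.mod_lt q hpm0
      have hhie : hi = q / 2 ^ (B * mid) := PySem.Int.floordiv_eq_ediv_of_pos hpm0
      have hhi0 : 0 ≤ hi := by rw [hhie]; exact Int.ediv_nonneg hq0 (le_of_lt hpm0)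
      have hpowsplit : (2:Int) ^ (B * (n - mid)) * 2 ^ (B * mid) = 2 ^ (B * n) := by
        rw [← pow_add]
        congr 1
        have : B * (n - mid) + B * mid = B * n := by
          rw [← Nat.mul_add]
          congr 1
          omega
        exact this
      have hhi1 : hi < 2 ^ (B * (n - mid)) := by
        rw [hhie]
        apply (Int.ediv_lt_iff_lt_mul hpm0).mpr
        rw [hpowsplit]
        exact hq1
      obtain ⟨hlL, hlG⟩ := IH mid lo hmid1 (by omega) hlo0 hlo1
      obtain ⟨hhL, hhG⟩ := IH (n - mid) hi (by omega) (by omega) hhi0 hhi1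
      have hdecomp := PySem.Int.floordiv_mul_add_mod q (2 ^ (B * mid))
      rw [← hhidef, ← hlodef] at hdecomp
      refine ⟨by rw [List.length_append, hlL, hhL]; omega, ?_⟩
      intro i hin
      by_cases hcase : i < mid
      · rw [List.getD_append _ _ 0 i (by rw [hlL]; exact hcase), hlG i hcase]
        have hpi : (0:Int) < 2 ^ (B * i) := pow_pos (by norm_num) _
        have hsplit2 : (2:Int) ^ (B * mid) = 2 ^ (B * (mid - i)) * 2 ^ (B * i) := by
          rw [← pow_add]
          congr 1
          rw [← Nat.mul_add]
          congr 1
          omega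
        have hq : q = (hi * 2 ^ (B * (mid - i))) * 2 ^ (B * i) + lo := by
          rw [mul_assoc, ← hsplit2]
          omega
        have hfd : PySem.Int.floordiv q (2 ^ (B * i))
            = hi * 2 ^ (B * (mid - i)) + PySem.Int.floordiv lo (2 ^ (B * i)) := by
          rw [PySem.Int.floordiv_eq_ediv_of_pos hpi, PySem.Int.floordiv_eq_ediv_of_pos hpi, hq]
          rw [add_comm ((hi * 2 ^ (B * (mid - i))) * 2 ^ (B * i)) lo]
          rw [Int.add_mul_ediv_right lo _ (ne_of_gt hpi)]
          omega
        rw [hfd]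
        have hexp : B * (mid - i) = B * (mid - i - 1) + B := by
          have h := Nat.mul_succ B (mid - i - 1)
          rw [Nat.succ_eq_add_one, show mid - i - 1 + 1 = mid - i from by omega] at h
          omega
        rw [show hi * 2 ^ (B * (mid - i)) + PySem.Int.floordiv lo (2 ^ (B * i))
            = PySem.Int.floordiv lo (2 ^ (B * i)) + (hi * 2 ^ (B * (mid - i - 1))) * 2 ^ B from by
          rw [hexp, pow_add]; ring]
        rw [pv_mod_add_mul _ _ _ (ne_of_gt hb2)]
      · rw [List.getD_append_right _ _ 0 i (by rw [hlL]; omega), hlL,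
          hhG (i - mid) (by omega)]
        congr 1
        have hpi : (0:Int) < 2 ^ (B * (i - mid)) := pow_pos (by norm_num) _
        rw [PySem.Int.floordiv_eq_ediv_of_pos hpi, hhie,
          PySem.Int.floordiv_eq_ediv_of_pos (pow_pos (by norm_num) _),
          Int.ediv_ediv_of_nonneg (le_of_lt hpm0)]
        congr 1
        rw [← pow_add]
        congr 1
        rw [← Nat.mul_add]
        congr 1
        omega

-- ---------- _euler_poly computes eu ----------
-- partial eu: contributions of the pentagonal indices 1 ≤ j < j0
def epart (j0 m : Nat) : Int :=
  (if m = 0 then 1 else 0) +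
    ∑ j ∈ Finset.Ico 1 j0, esign j * ((if gp j = m then 1 else 0) + (if gp j + j = m then 1 else 0))

theorem esign_eq (j : Nat) : (if j % 2 = 1 then (-1 : Int) else 1) = esign j := by
  unfold esign
  rcases Nat.mod_two_eq_zero_or_one j with h | h <;> simp [h]

theorem epart_eq_eu (j0 m : Nat) (h1 : 1 ≤ j0) (hbig : ∀ j, j0 ≤ j → m < gp j) :
    epart j0 m = eu m := by
  unfold epart eu
  congr 1
  have hterm0 : ∀ j, 1 ≤ j → m < gp j →
      esign j * ((if gp j = m then 1 else 0) + (if gp j + j = m then (1:Int) else 0)) = 0 := by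
    intro j hj hm
    rw [if_neg (by omega), if_neg (by omega)]
    ring
  have h1' : (∑ j ∈ Finset.Ico 1 j0, esign j * ((if gp j = m then 1 else 0) + (if gp j + j = m then (1:Int) else 0))) =
      ∑ j ∈ Finset.Ico 1 (max j0 (m + 1)), esign j * ((if gp j = m then 1 else 0) + (if gp j + j = m then (1:Int) else 0)) := by
    apply Finset.sum_subset (Finset.Ico_subset_Ico le_rfl (le_max_left _ _))
    intro j hj hnj
    simp only [Finset.mem_Ico] at hj hnj
    exact hterm0 j (by omega) (hbig j (by omega))
  have h2' : (∑ j ∈ Finset.Icc 1 m, esign j * ((if gp j = m then 1 else 0) + (if gp j + j = m then (1:Int) else 0))) =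
      ∑ j ∈ Finset.Ico 1 (max j0 (m + 1)), esign j * ((if gp j = m then 1 else 0) + (if gp j + j = m then (1:Int) else 0)) := by
    rw [← Finset.Ico_add_one_right_eq_Icc]
    apply Finset.sum_subset (Finset.Ico_subset_Ico le_rfl (le_max_right _ _))
    intro j hj hnj
    simp only [Finset.mem_Ico] at hj hnj
    have hjm : m < j := by omega
    exact hterm0 j (by omega) (by have := gp_ge_self j (by omega); omega)
  rw [h1', h2']

theorem eulerLoop_spec (N : Nat) (k : Int) (hk : k ≠ 0) :
    ∀ (fuel j0 : Nat) (e : Array Int), 1 ≤ j0 → e.size = N + 1 →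
      (∀ m ≤ N, pvCanon k (e.getD m 0) ∧ e.getD m 0 ≡ epart j0 m [ZMOD k]) →
      N + 2 - j0 ≤ fuel →
      (eulerLoop N k e j0 fuel).size = N + 1 ∧
      ∀ m ≤ N, pvCanon k ((eulerLoop N k e j0 fuel).getD m 0) ∧
        (eulerLoop N k e j0 fuel).getD m 0 ≡ eu m [ZMOD k] := by
  intro fuel
  induction fuel with
  | zero =>
    intro j0 e hj0 hsz hinv hfuel
    rw [eulerLoop]
    refine ⟨hsz, fun m hm => ⟨(hinv m hm).1, ?_⟩⟩
    rw [← epart_eq_eu j0 m hj0 (fun j hj => by have h2 := gp_ge_self j (by omega); omega)]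
    exact (hinv m hm).2
  | succ fuel IH =>
    intro j0 e hj0 hsz hinv hfuel
    by_cases hg : gp j0 ≤ N
    · have step : eulerLoop N k e j0 (fuel + 1) = eulerLoop N k
          (let s : Int := if j0 % 2 = 1 then -1 else 1
           let g := j0 * (3 * j0 - 1) / 2
           let e1 := e.set! g (PySem.Int.mod (e.getD g 0 + s) k)
           if g + j0 ≤ N then e1.set! (g + j0) (PySem.Int.mod (e1.getD (g + j0) 0 + s) k) else e1)
          (j0 + 1) fuel := by
        rw [eulerLoop]
        rw [if_pos (show j0 * (3 * j0 - 1) / 2 ≤ N from hg)]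
      rw [step]
      have hjN : j0 ≤ N := le_trans (gp_ge_self j0 hj0) hg
      have hgg : j0 * (3 * j0 - 1) / 2 = gp j0 := rfl
      set s : Int := if j0 % 2 = 1 then -1 else 1 with hs
      set e1 := e.set! (j0 * (3 * j0 - 1) / 2) (PySem.Int.mod (e.getD (j0 * (3 * j0 - 1) / 2) 0 + s) k) with he1
      have hsz1 : e1.size = N + 1 := by rw [he1, arr_size_set, hsz]
      set e2 := if j0 * (3 * j0 - 1) / 2 + j0 ≤ N then
          e1.set! (j0 * (3 * j0 - 1) / 2 + j0) (PySem.Int.mod (e1.getD (j0 * (3 * j0 - 1) / 2 + j0) 0 + s) k) else e1 with he2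
      have hsz2 : e2.size = N + 1 := by
        rw [he2]
        split_ifs
        · rw [arr_size_set, hsz1]
        · exact hsz1
      apply IH (j0 + 1) e2 (by omega) hsz2 ?_ (by omega)
      intro m hm
      have hnext : epart (j0 + 1) m = epart j0 m +
          esign j0 * ((if gp j0 = m then 1 else 0) + (if gp j0 + j0 = m then 1 else 0)) := by
        unfold epart
        rw [Finset.sum_Ico_succ_top (by omega)]
        ring
      have hgj : gp j0 ≠ gp j0 + j0 := by omega
      by_cases hm1 : m = gp j0
      · -- the first write
        have he2m : e2.getD m 0 = e1.getD m 0 := by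
          rw [he2]
          split_ifs with hcond
          · exact arr_getD_set_ne e1 _ _ _ (by omega)
          · rfl
        have he1m : e1.getD m 0 = PySem.Int.mod (e.getD m 0 + s) k := by
          rw [he1, hgg, ← hm1]
          exact arr_getD_set_self e _ _ (by omega)
        rw [he2m, he1m]
        refine ⟨pv_canon_mod k _ hk, ?_⟩
        rw [hnext, if_pos hm1.symm, if_neg (by omega)]
        calc PySem.Int.mod (e.getD m 0 + s) k
            ≡ e.getD m 0 + s [ZMOD k] := pv_mod_modeq k _ hk
          _ ≡ epart j0 m + s [ZMOD k] := Int.ModEq.add (hinv m hm).2 Int.ModEq.rfl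
          _ = epart j0 m + esign j0 * ((1:Int) + 0) := by rw [hs, esign_eq]; ring
      · by_cases hm2 : m = gp j0 + j0
        · -- the second write (its guard holds since m ≤ N)
          have hcond : j0 * (3 * j0 - 1) / 2 + j0 ≤ N := by rw [hgg]; omega
          have he2m : e2.getD m 0 = PySem.Int.mod (e1.getD m 0 + s) k := by
            rw [he2, if_pos hcond, hgg, ← hm2]
            exact arr_getD_set_self e1 _ _ (by rw [hsz1]; omega)
          have he1m : e1.getD m 0 = e.getD m 0 := by
            rw [he1]
            exact arr_getD_set_ne e _ _ _ (by rw [hgg]; omega)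
          rw [he2m, he1m]
          refine ⟨pv_canon_mod k _ hk, ?_⟩
          rw [hnext, if_neg (by omega), if_pos hm2.symm]
          calc PySem.Int.mod (e.getD m 0 + s) k
              ≡ e.getD m 0 + s [ZMOD k] := pv_mod_modeq k _ hk
            _ ≡ epart j0 m + s [ZMOD k] := Int.ModEq.add (hinv m hm).2 Int.ModEq.rfl
            _ = epart j0 m + esign j0 * ((0:Int) + 1) := by rw [hs, esign_eq]; ring
        · -- untouched slot
          have he2m : e2.getD m 0 = e1.getD m 0 := by
            rw [he2]
            split_ifs with hcond
            · exact arr_getD_set_ne e1 _ _ _ (by rw [hgg]; omega)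
            · rfl
          have he1m : e1.getD m 0 = e.getD m 0 := by
            rw [he1]
            exact arr_getD_set_ne e _ _ _ (by rw [hgg]; omega)
          rw [he2m, he1m]
          refine ⟨(hinv m hm).1, ?_⟩
          rw [hnext, if_neg (by omega), if_neg (by omega)]
          simpa using (hinv m hm).2
    · have step : eulerLoop N k e j0 (fuel + 1) = e := by
        rw [eulerLoop]
        rw [if_neg (show ¬ j0 * (3 * j0 - 1) / 2 ≤ N from hg)]
      rw [step]
      refine ⟨hsz, fun m hm => ⟨(hinv m hm).1, ?_⟩⟩
      rw [← epart_eq_eu j0 m hj0 (fun j hj => by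
        have := gp_mono j0 j hj0 hj
        omega)]
      exact (hinv m hm).2

theorem eulerPoly_spec (N : Nat) (k : Int) (hk : k ≠ 0) :
    (eulerPoly N k).size = N + 1 ∧
    ∀ m ≤ N, pvCanon k ((eulerPoly N k).getD m 0) ∧
      (eulerPoly N k).getD m 0 ≡ eu m [ZMOD k] := by
  unfold eulerPoly
  apply eulerLoop_spec N k hk (N + 1) 1 _ (by omega) (by rw [arr_size_set]; simp) ?_ (by omega)
  intro m hm
  by_cases hm0 : m = 0
  · subst hm0
    rw [arr_getD_set_self _ _ _ (by simp)]
    refine ⟨pv_canon_mod k _ hk, ?_⟩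
    have : epart 1 0 = 1 := by simp [epart]
    rw [this]
    exact pv_mod_modeq k 1 hk |>.trans (by norm_num)
  · rw [arr_getD_set_ne _ _ _ _ hm0, arr_getD_replicate _ _ (by omega)]
    refine ⟨pv_canon_zero k hk, ?_⟩
    have : epart 1 m = 0 := by simp [epart, hm0]
    rw [this]



theorem bitLoop_spec (bound : Int) :
    ∀ (fuel B : Nat), bound < 2 ^ (B + fuel) → bound < 2 ^ (bitLoop bound B fuel) := by
  intro fuel
  induction fuel with
  | zero => intro B h; simpa using h
  | succ fuel IH =>
    intro B h
    rw [bitLoop]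
    split_ifs with hle
    · exact IH (B + 1) (by rw [show B + 1 + fuel = B + (fuel + 1) from by omega]; exact h)
    · omega

theorem bitLoop_ge (bound : Int) : ∀ (fuel B : Nat), 1 ≤ B → 1 ≤ bitLoop bound B fuel := by
  intro fuel
  induction fuel with
  | zero => intro B h; simpa [bitLoop] using h
  | succ fuel IH =>
    intro B h
    rw [bitLoop]
    split_ifs with hle
    · exact IH (B + 1) (by omega)
    · exact h

theorem conv_bound (f g : Nat → Int) (K : Int) (sa : Nat)
    (hf : ∀ i, 0 ≤ f i ∧ f i ≤ K - 1) (hg : ∀ i, 0 ≤ g i ∧ g i ≤ K - 1)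
    (hfa : ∀ i, sa ≤ i → f i = 0) (n : Nat) :
    0 ≤ conv f g n ∧ conv f g n ≤ (sa : Int) * (K - 1) * (K - 1) := by
  have hK1 : (0:Int) ≤ K - 1 := le_trans (hf 0).1 (hf 0).2
  constructor
  · apply Finset.sum_nonneg
    intro i _
    exact mul_nonneg (hf i).1 (hg (n - i)).1
  · have hle : conv f g n ≤ ∑ i ∈ Finset.range (n + 1),
        (if i ∈ Finset.range sa then (K - 1) * (K - 1) else 0) := by
      apply Finset.sum_le_sum
      intro i _
      by_cases hi : i ∈ Finset.range sa
      · rw [if_pos hi]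
        exact mul_le_mul (hf i).2 (hg (n - i)).2 (hg (n - i)).1 hK1
      · rw [if_neg hi]
        simp only [Finset.mem_range, not_lt] at hi
        rw [hfa i hi, zero_mul]
    refine le_trans hle ?_
    rw [Finset.sum_ite_mem]
    rw [Finset.sum_const]
    have hcard : ((Finset.range (n + 1)) ∩ (Finset.range sa)).card ≤ sa := by
      calc ((Finset.range (n + 1)) ∩ (Finset.range sa)).card
          ≤ (Finset.range sa).card := Finset.card_le_card Finset.inter_subset_right
        _ = sa := Finset.card_range sa
    calc (((Finset.range (n + 1)) ∩ (Finset.range sa)).card : Int) • ((K - 1) * (K - 1))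
        = (((Finset.range (n + 1)) ∩ (Finset.range sa)).card : Int) * ((K - 1) * (K - 1)) := by
          rw [smul_eq_mul]
      _ ≤ (sa : Int) * ((K - 1) * (K - 1)) := by
          apply mul_le_mul_of_nonneg_right _ (mul_nonneg hK1 hK1)
          exact_mod_cast hcard
      _ = (sa : Int) * (K - 1) * (K - 1) := by ring

theorem pack_mul (f g : Nat → Int) (x : Int) (sa sb : Nat)
    (hfa : ∀ i, sa ≤ i → f i = 0) (hgb : ∀ j, sb ≤ j → g j = 0) :
    (∑ i ∈ Finset.range sa, f i * x ^ i) * (∑ j ∈ Finset.range sb, g j * x ^ j)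
      = ∑ n ∈ Finset.range (sa + sb), conv f g n * x ^ n := by
  set p : Polynomial ℤ := ∑ i ∈ Finset.range sa, Polynomial.C (f i) * Polynomial.X ^ i with hp
  set q : Polynomial ℤ := ∑ j ∈ Finset.range sb, Polynomial.C (g j) * Polynomial.X ^ j with hq
  have hcp : ∀ n, p.coeff n = f n := by
    intro n
    rw [hp, Polynomial.finset_sum_coeff]
    have : ∀ i ∈ Finset.range sa, (Polynomial.C (f i) * Polynomial.X ^ i).coeff n
        = if i = n then f i else 0 := by
      intro i _
      simp [Polynomial.coeff_X_pow]
      split_ifs with h1 h2 h2 <;> first | rfl | omega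
    rw [Finset.sum_congr rfl this, Finset.sum_ite_eq' (Finset.range sa) n f]
    by_cases hn : n ∈ Finset.range sa
    · rw [if_pos hn]
    · rw [if_neg hn]
      simp only [Finset.mem_range, not_lt] at hn
      rw [hfa n hn]
  have hcq : ∀ n, q.coeff n = g n := by
    intro n
    rw [hq, Polynomial.finset_sum_coeff]
    have : ∀ j ∈ Finset.range sb, (Polynomial.C (g j) * Polynomial.X ^ j).coeff n
        = if j = n then g j else 0 := by
      intro j _
      simp [Polynomial.coeff_X_pow]
      split_ifs with h1 h2 h2 <;> first | rfl | omega
    rw [Finset.sum_congr rfl this, Finset.sum_ite_eq' (Finset.range sb) n g]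
    by_cases hn : n ∈ Finset.range sb
    · rw [if_pos hn]
    · rw [if_neg hn]
      simp only [Finset.mem_range, not_lt] at hn
      rw [hgb n hn]
  have hcpq : ∀ n, (p * q).coeff n = conv f g n := by
    intro n
    rw [Polynomial.coeff_mul, Finset.Nat.sum_antidiagonal_eq_sum_range_succ_mk]
    unfold conv
    apply Finset.sum_congr rfl
    intro i _
    rw [hcp, hcq]
  have hevalp : p.eval x = ∑ i ∈ Finset.range sa, f i * x ^ i := by
    rw [hp, Polynomial.eval_finset_sum]
    apply Finset.sum_congr rfl
    intro i _
    simp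
  have hevalq : q.eval x = ∑ j ∈ Finset.range sb, g j * x ^ j := by
    rw [hq, Polynomial.eval_finset_sum]
    apply Finset.sum_congr rfl
    intro j _
    simp
  have hconv0 : ∀ n, sa + sb ≤ n → conv f g n = 0 := by
    intro n hn
    apply Finset.sum_eq_zero
    intro i hi
    simp only [Finset.mem_range] at hi
    by_cases hia : sa ≤ i
    · rw [hfa i hia, zero_mul]
    · rw [hgb (n - i) (by omega), mul_zero]
  have hdeg : (p * q).natDegree < sa + sb ∨ p * q = 0 := by
    by_cases h0 : p * q = 0
    · exact Or.inr h0
    · left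
      by_contra hcon
      rw [Nat.not_lt] at hcon
      have hc : (p * q).coeff ((p * q).natDegree) ≠ 0 := by
        rw [← Polynomial.leadingCoeff]
        exact Polynomial.leadingCoeff_ne_zero.mpr h0
      rw [hcpq] at hc
      exact hc (hconv0 _ hcon)
  have heval : (p * q).eval x = ∑ n ∈ Finset.range (sa + sb), conv f g n * x ^ n := by
    rcases hdeg with hdeg | hdeg
    · rw [Polynomial.eval_eq_sum_range' hdeg x]
      apply Finset.sum_congr rfl
      intro n _
      rw [hcpq]
    · rw [hdeg]
      rw [Polynomial.eval_zero]
      symm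
      apply Finset.sum_eq_zero
      intro n _
      have : conv f g n = (p * q).coeff n := (hcpq n).symm
      rw [this, hdeg, Polynomial.coeff_zero, zero_mul]
  rw [← hevalp, ← hevalq, ← Polynomial.eval_mul, heval]

theorem arr_list_getD (l : List Int) (n : Nat) : (l.toArray).getD n 0 = l.getD n 0 := by
  by_cases h : n < l.length
  · simp [Array.getD, h, List.getD]
  · simp [Array.getD, h, List.getD]

theorem mulTrunc_spec (a b : Array Int) (m : Nat) (k : Int) (hk : k ≠ 0)
    (ha : 1 ≤ a.size) (hb : 1 ≤ b.size) (hm1 : 1 ≤ m) (hm : m ≤ a.size + b.size) :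
    (mulTrunc a b m k).size = m ∧
    ∀ n < m, pvCanon k ((mulTrunc a b m k).getD n 0) ∧
      (mulTrunc a b m k).getD n 0 ≡ conv (ahat a) (ahat b) n [ZMOD k] := by
  have hK : (0:Int) < (if k > 0 then k else -k) := by split_ifs with h <;> omega
  set K := if k > 0 then k else -k with hKdef
  have hKdvd : ∀ z : Int, K ∣ z → k ∣ z := by
    intro z hz
    rw [hKdef] at hz
    split_ifs at hz with h
    · exact hz
    · exact (Int.neg_dvd).mp hz
  set bound := (max a.size b.size : Int) * (K - 1) * (K - 1) with hbounddef
  have hbound0 : 0 ≤ bound := by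
    apply mul_nonneg (mul_nonneg (by positivity) (by omega)) (by omega)
  set B := bitLoop bound 1 (bound.toNat + 2) with hBdef
  have hB1 : 1 ≤ B := bitLoop_ge bound _ 1 le_rfl
  have hbase : bound < 2 ^ B := by
    apply bitLoop_spec
    calc bound = ((bound.toNat : Int)) := by omega
      _ < 2 ^ bound.toNat := by exact_mod_cast Nat.lt_two_pow_self
      _ ≤ 2 ^ (1 + (bound.toNat + 2)) := by
          apply pow_le_pow_right₀ (by norm_num)
          omega
  have hb2 : (0:Int) < 2 ^ B := pow_pos (by norm_num) B
  set rfa : Nat → Int := fun i => PySem.Int.mod (ahat a i) K with hrfa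
  set rfb : Nat → Int := fun i => PySem.Int.mod (ahat b i) K with hrfb
  have hrange_a : ∀ i, 0 ≤ rfa i ∧ rfa i ≤ K - 1 := by
    intro i
    constructor
    · exact PySem.Int.mod_nonneg _ hK
    · show PySem.Int.mod (ahat a i) K ≤ K - 1
      have := PySem.Int.mod_lt (ahat a i) hK
      omega
  have hrange_b : ∀ i, 0 ≤ rfb i ∧ rfb i ≤ K - 1 := by
    intro i
    constructor
    · exact PySem.Int.mod_nonneg _ hK
    · show PySem.Int.mod (ahat b i) K ≤ K - 1
      have := PySem.Int.mod_lt (ahat b i) hK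
      omega
  have hsupp_a : ∀ i, a.size ≤ i → rfa i = 0 := by
    intro i hi
    rw [hrfa]
    show PySem.Int.mod (ahat a i) K = 0
    rw [show ahat a i = 0 from arr_getD_oob a i hi]
    exact pv_canon_zero K (ne_of_gt hK)
  have hsupp_b : ∀ j, b.size ≤ j → rfb j = 0 := by
    intro j hj
    rw [hrfb]
    show PySem.Int.mod (ahat b j) K = 0
    rw [show ahat b j = 0 from arr_getD_oob b j hj]
    exact pv_canon_zero K (ne_of_gt hK)
  have hmap_a : ∀ i, ahat (a.map fun x => PySem.Int.mod x K) i = rfa i := by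
    intro i
    by_cases hi : i < a.size
    · show (a.map fun x => PySem.Int.mod x K).getD i 0 = _
      simp [Array.getD, hi, hrfa, ahat]
    · have h1 : ahat (a.map fun x => PySem.Int.mod x K) i = 0 :=
        arr_getD_oob _ i (by simpa using (Nat.not_lt.mp hi))
      rw [h1, hsupp_a i (by omega)]
  have hmap_b : ∀ i, ahat (b.map fun x => PySem.Int.mod x K) i = rfb i := by
    intro i
    by_cases hi : i < b.size
    · show (b.map fun x => PySem.Int.mod x K).getD i 0 = _
      simp [Array.getD, hi, hrfb, ahat]
    · have h1 : ahat (b.map fun x => PySem.Int.mod x K) i = 0 :=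
        arr_getD_oob _ i (by simpa using (Nat.not_lt.mp hi))
      rw [h1, hsupp_b i (by omega)]
  -- digit bounds for the convolution of the residues
  have hdig : ∀ n, 0 ≤ conv rfa rfb n ∧ conv rfa rfb n < 2 ^ B := by
    intro n
    obtain ⟨h0, h1⟩ := conv_bound rfa rfb K a.size hrange_a hrange_b hsupp_a n
    refine ⟨h0, lt_of_le_of_lt (le_trans h1 ?_) hbase⟩
    rw [hbounddef]
    apply mul_le_mul_of_nonneg_right _ (by omega)
    apply mul_le_mul_of_nonneg_right _ (by omega)
    exact_mod_cast Nat.le_max_left a.size b.size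
  -- the packed integers
  have hpa : packDC (a.map fun x => PySem.Int.mod x K) B 0 a.size a.size
      = ∑ i ∈ Finset.range a.size, rfa i * ((2:Int) ^ B) ^ i := by
    rw [packDC_spec _ B a.size 0 a.size (by omega) (by omega)]
    apply Finset.sum_congr rfl
    intro i _
    rw [hmap_a, ← pow_mul]
    norm_num
  have hpb : packDC (b.map fun x => PySem.Int.mod x K) B 0 b.size b.size
      = ∑ j ∈ Finset.range b.size, rfb j * ((2:Int) ^ B) ^ j := by
    rw [packDC_spec _ B b.size 0 b.size (by omega) (by omega)]
    apply Finset.sum_congr rfl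
    intro j _
    rw [hmap_b, ← pow_mul]
    norm_num
  -- the product is the digit expansion of the convolution
  have hprodsum : packDC (a.map fun x => PySem.Int.mod x K) B 0 a.size a.size *
      packDC (b.map fun x => PySem.Int.mod x K) B 0 b.size b.size
      = ∑ n ∈ Finset.range (a.size + b.size), conv rfa rfb n * ((2:Int) ^ B) ^ n := by
    rw [hpa, hpb]
    exact pack_mul rfa rfb ((2:Int) ^ B) a.size b.size hsupp_a hsupp_b
  -- truncating with mod 2^(B*m) keeps the first m digits
  have hdigb : ∀ n < a.size + b.size, 0 ≤ conv rfa rfb n ∧ conv rfa rfb n < 2 ^ B :=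
    fun n _ => hdig n
  obtain ⟨hlow0, hlow1⟩ := digsum_nonneg_lt ((2:Int) ^ B) hb2 (conv rfa rfb) m
    (fun n _ => hdig n)
  have hmodprod : PySem.Int.mod
      (packDC (a.map fun x => PySem.Int.mod x K) B 0 a.size a.size *
        packDC (b.map fun x => PySem.Int.mod x K) B 0 b.size b.size) (2 ^ (B * m))
      = ∑ n ∈ Finset.range m, conv rfa rfb n * ((2:Int) ^ B) ^ n := by
    rw [hprodsum, digsum_split ((2:Int) ^ B) (conv rfa rfb) (a.size + b.size) m hm]
    have hpow : ((2:Int) ^ B) ^ m = 2 ^ (B * m) := by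
      rw [← pow_mul]
    rw [hpow, pv_mod_add_mul _ _ _ (by positivity)]
    rw [PySem.Int.mod_eq_emod_of_pos (by positivity)]
    rw [← hpow]
    exact Int.emod_eq_of_lt hlow0 hlow1
  -- finish: unpack, map mod k
  have hmt : mulTrunc a b m k
      = ((unpackDC B (PySem.Int.mod
          (packDC (a.map fun x => PySem.Int.mod x K) B 0 a.size a.size *
           packDC (b.map fun x => PySem.Int.mod x K) B 0 b.size b.size) (2 ^ (B * m))) m m).map
          fun d => PySem.Int.mod d k).toArray := rfl
  rw [hmt, hmodprod]
  obtain ⟨hlen, hget⟩ := unpackDC_spec B m m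
    (∑ n ∈ Finset.range m, conv rfa rfb n * ((2:Int) ^ B) ^ n) hm1 le_rfl hlow0
    (by rw [pow_mul]; exact hlow1)
  constructor
  · simp [hlen]
  · intro n hn
    have hentry : (((unpackDC B (∑ n ∈ Finset.range m, conv rfa rfb n * ((2:Int) ^ B) ^ n) m m).map
        fun d => PySem.Int.mod d k).toArray).getD n 0
        = PySem.Int.mod (conv rfa rfb n) k := by
      rw [arr_list_getD]
      have hgd : ((unpackDC B (∑ n ∈ Finset.range m, conv rfa rfb n * ((2:Int) ^ B) ^ n) m m).map
          fun d => PySem.Int.mod d k).getD n 0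
          = PySem.Int.mod ((unpackDC B (∑ n ∈ Finset.range m, conv rfa rfb n * ((2:Int) ^ B) ^ n) m m).getD n 0) k := by
        have hn2 : n < (unpackDC B (∑ n ∈ Finset.range m, conv rfa rfb n * ((2:Int) ^ B) ^ n) m m).length := by
          rw [hlen]; exact hn
        rw [List.getD_eq_getElem _ 0 (by rw [List.length_map]; exact hn2),
          List.getElem_map, ← List.getD_eq_getElem _ 0 hn2]
      rw [hgd, hget n hn]
      congr 1
      rw [show (2:Int) ^ (B * n) = ((2:Int) ^ B) ^ n from by rw [← pow_mul]]
      exact digsum_extract ((2:Int) ^ B) hb2 (conv rfa rfb) m n (fun j hj => hdig j) hn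
    rw [hentry]
    refine ⟨pv_canon_mod k _ hk, ?_⟩
    have hcong : conv rfa rfb n ≡ conv (ahat a) (ahat b) n [ZMOD K] := by
      apply conv_modeq
      · intro i _
        exact pv_mod_modeq K (ahat a i) (ne_of_gt hK)
      · intro i _
        exact pv_mod_modeq K (ahat b i) (ne_of_gt hK)
    have hcongk : PySem.Int.mod (conv rfa rfb n) k = PySem.Int.mod (conv (ahat a) (ahat b) n) k := by
      apply pv_mod_eq_of_modeq k _ _ hk
      exact Int.modEq_iff_dvd.mpr (hKdvd _ (Int.modEq_iff_dvd.mp hcong))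
    rw [hcongk]
    exact pv_mod_modeq k _ hk

-- ---------- the Newton iteration inverts eulerPoly ----------
def newtonGood (k : Int) (E inv : Array Int) (m : Nat) : Prop :=
  inv.size = m ∧ (∀ i < m, pvCanon k (inv.getD i 0)) ∧
    (∀ i < m, conv (ahat E) (ahat inv) i ≡ dlt i [ZMOD k])

theorem arr_getD_map_mod (k : Int) (c : Array Int) (j : Nat) (h : j < c.size) :
    (c.map (fun x => PySem.Int.mod (-x) k)).getD j 0 = PySem.Int.mod (-(c.getD j 0)) k := by
  simp [Array.getD, h]

theorem newton_step (k : Int) (hk : k ≠ 0) (E inv : Array Int) (N m : Nat)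
    (hm : 1 ≤ m) (hmN : m ≤ N) (hE : E.size = N + 1) (hg : newtonGood k E inv m) :
    newtonGood k E
      (mulTrunc
        (((mulTrunc E inv (min (2*m) (N+1)) k).map (fun x => PySem.Int.mod (-x) k)).set! 0
          (PySem.Int.mod (2 - (mulTrunc E inv (min (2*m) (N+1)) k).getD 0 0) k))
        inv (min (2*m) (N+1)) k)
      (min (2*m) (N+1)) := by
  obtain ⟨hsz, hcan, hconv⟩ := hg
  set m2 := min (2*m) (N+1) with hm2
  have hm2ge : 2 ≤ m2 := by
    have h1 : 2 ≤ 2*m := by omega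
    have h2 : 2 ≤ N+1 := by omega
    exact le_min h1 h2
  have hm2le : m2 ≤ 2*m := Nat.min_le_left _ _
  have hszE : 1 ≤ E.size := by omega
  have hszI : 1 ≤ inv.size := by omega
  have hm2EI : m2 ≤ E.size + inv.size := by omega
  set c := mulTrunc E inv m2 k with hc
  obtain ⟨hcsz, hcspec⟩ := mulTrunc_spec E inv m2 k hk hszE hszI (by omega) hm2EI
  rw [← hc] at hcsz hcspec
  set cc := conv (ahat E) (ahat inv) with hcc
  set t2 := (c.map (fun x => PySem.Int.mod (-x) k)).set! 0
      (PySem.Int.mod (2 - c.getD 0 0) k) with ht2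
  have ht2sz : t2.size = m2 := by rw [ht2, arr_size_set, Array.size_map, hcsz]
  -- t2 is congruent to 2·δ − c everywhere
  have ht2val : ∀ j, ahat t2 j ≡ 2 * dlt j - ahat c j [ZMOD k] := by
    intro j
    rcases Nat.eq_zero_or_pos j with rfl | hj
    · have h0 : t2.getD 0 0 = PySem.Int.mod (2 - c.getD 0 0) k := by
        rw [ht2]
        exact arr_getD_set_self _ _ _ (by rw [Array.size_map, hcsz]; omega)
      show t2.getD 0 0 ≡ _ [ZMOD k]
      rw [h0]
      refine (pv_mod_modeq k _ hk).trans ?_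
      unfold dlt ahat
      norm_num
    · by_cases hjm : j < m2
      · have h1 : t2.getD j 0 = PySem.Int.mod (-(c.getD j 0)) k := by
          rw [ht2, arr_getD_set_ne _ _ _ _ (by omega)]
          exact arr_getD_map_mod k c j (by omega)
        show t2.getD j 0 ≡ _ [ZMOD k]
        rw [h1]
        refine (pv_mod_modeq k _ hk).trans ?_
        unfold dlt ahat
        rw [if_neg (by omega)]
        have he : (2:Int) * 0 - c.getD j 0 = -(c.getD j 0) := by ring
        rw [he]
      · have h1 : ahat t2 j = 0 := arr_getD_oob _ _ (by omega)
        have h2 : ahat c j = 0 := arr_getD_oob _ _ (by omega)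
        rw [h1, h2]
        unfold dlt
        rw [if_neg (by omega)]
        norm_num
  obtain ⟨hisz, hispec⟩ := mulTrunc_spec t2 inv m2 k hk (by omega) hszI (by omega) (by omega)
  refine ⟨hisz, fun i hi => (hispec i hi).1, fun i hi => ?_⟩
  -- chain of congruences down to the Newton identity
  have s1 : conv (ahat E) (ahat (mulTrunc t2 inv m2 k)) i ≡
      conv (ahat E) (conv (ahat t2) (ahat inv)) i [ZMOD k] := by
    apply conv_modeq _ _ _ _ _ (fun p _ => Int.ModEq.rfl)
    intro p hp
    exact (hispec p (by omega)).2
  have s2 : conv (ahat E) (conv (ahat t2) (ahat inv)) i ≡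
      conv (ahat E) (conv (fun j => 2 * dlt j - cc j) (ahat inv)) i [ZMOD k] := by
    apply conv_modeq _ _ _ _ _ (fun p _ => Int.ModEq.rfl)
    intro p hp
    refine conv_modeq _ _ _ _ _ ?_ (fun q _ => Int.ModEq.rfl)
    intro q hq
    refine (ht2val q).trans ?_
    apply Int.ModEq.sub Int.ModEq.rfl
    exact (hcspec q (by omega)).2
  have s3 : conv (ahat E) (conv (fun j => 2 * dlt j - cc j) (ahat inv)) i =
      conv cc (fun j => 2 * dlt j - cc j) i := by
    rw [conv_assoc_comm]
  have s4 : conv cc (fun j => 2 * dlt j - cc j) i ≡ dlt i [ZMOD k] :=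
    newton_key k cc m i hm (by omega) (fun p hp => hconv p hp)
  exact ((s1.trans s2).trans (s3 ▸ s4))

theorem newtonLoop_spec (E : Array Int) (N : Nat) (k : Int) (hk : k ≠ 0) (hE : E.size = N + 1) :
    ∀ (fuel m : Nat) (inv : Array Int), 1 ≤ m → m ≤ N + 1 → newtonGood k E inv m →
      N + 2 - m ≤ fuel → newtonGood k E (newtonLoop E N k inv m fuel) (N + 1) := by
  intro fuel
  induction fuel with
  | zero =>
    intro m inv h1 h2 hg hf
    omega
  | succ fuel IH =>
    intro m inv h1 h2 hg hf
    by_cases hmN : m ≤ N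
    · have step : newtonLoop E N k inv m (fuel + 1) =
          newtonLoop E N k
            (mulTrunc
              (((mulTrunc E inv (min (2*m) (N+1)) k).map (fun x => PySem.Int.mod (-x) k)).set! 0
                (PySem.Int.mod (2 - (mulTrunc E inv (min (2*m) (N+1)) k).getD 0 0) k))
              inv (min (2*m) (N+1)) k)
            (min (2*m) (N+1)) fuel := by
        rw [newtonLoop]
        rw [if_pos hmN]
      rw [step]
      have hstep := newton_step k hk E inv N m h1 hmN hE hg
      have hmin1 : m + 1 ≤ min (2*m) (N+1) := le_min (by omega) (by omega)
      have hmin2 : min (2*m) (N+1) ≤ N + 1 := Nat.min_le_right _ _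
      exact IH (min (2*m) (N+1)) _ (by omega) hmin2 hstep (by omega)
    · have hm : m = N + 1 := by omega
      have step : newtonLoop E N k inv m (fuel + 1) = inv := by
        rw [newtonLoop]
        rw [if_neg hmN]
      rw [step, ← hm]
      exact hg

theorem seriesInverse_good (N : Nat) (k : Int) (hk : k ≠ 0) :
    newtonGood k (eulerPoly N k) (seriesInverse (eulerPoly N k) N k) (N + 1) := by
  unfold seriesInverse
  apply newtonLoop_spec (eulerPoly N k) N k hk (eulerPoly_spec N k hk).1 (N + 1) 1 _ (by omega) (by omega) ?_ (by omega)
  refine ⟨rfl, ?_, ?_⟩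
  · intro i hi
    have h0 : i = 0 := by omega
    subst h0
    show pvCanon k ((#[PySem.Int.mod 1 k]).getD 0 0)
    exact pv_canon_mod k 1 hk
  · intro i hi
    have h0 : i = 0 := by omega
    subst h0
    unfold conv
    rw [Finset.sum_range_one]
    have he0 := ((eulerPoly_spec N k hk).2 0 (by omega)).2
    rw [eu_zero] at he0
    have hi0 : ahat (#[PySem.Int.mod 1 k]) 0 = PySem.Int.mod 1 k := rfl
    show ahat (eulerPoly N k) 0 * ahat (#[PySem.Int.mod 1 k]) (0 - 0) ≡ dlt 0 [ZMOD k]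
    rw [hi0]
    have hm1 : PySem.Int.mod 1 k ≡ 1 [ZMOD k] := pv_mod_modeq k 1 hk
    unfold dlt
    rw [if_pos rfl]
    calc ahat (eulerPoly N k) 0 * PySem.Int.mod 1 k ≡ 1 * 1 [ZMOD k] := Int.ModEq.mul he0 hm1
      _ = 1 := by ring

theorem seriesInverse_vals (N : Nat) (k : Int) (hk : k ≠ 0) :
    ∀ n, 1 ≤ n → n ≤ N → (seriesInverse (eulerPoly N k) N k).getD n 0 = Mfun k n := by
  obtain ⟨hsz, hcan, hconv⟩ := seriesInverse_good N k hk
  have he := eulerPoly_spec N k hk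
  have h0 : ahat (seriesInverse (eulerPoly N k) N k) 0 ≡ 1 [ZMOD k] := by
    have hcv := hconv 0 (by omega)
    unfold conv at hcv
    rw [Finset.sum_range_one] at hcv
    have he0 := (he.2 0 (by omega)).2
    rw [eu_zero] at he0
    have : ahat (seriesInverse (eulerPoly N k) N k) 0 ≡
        ahat (eulerPoly N k) 0 * ahat (seriesInverse (eulerPoly N k) N k) (0 - 0) [ZMOD k] := by
      show ahat _ 0 ≡ _ [ZMOD k]
      calc ahat (seriesInverse (eulerPoly N k) N k) 0
          = 1 * ahat (seriesInverse (eulerPoly N k) N k) (0 - 0) := by ring_nf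
        _ ≡ ahat (eulerPoly N k) 0 * ahat (seriesInverse (eulerPoly N k) N k) (0 - 0) [ZMOD k] :=
            Int.ModEq.mul he0.symm Int.ModEq.rfl
    exact this.trans (hcv.trans (by unfold dlt; rw [if_pos rfl]))
  apply pv_unique k hk N (ahat (seriesInverse (eulerPoly N k) N k)) h0
  · intro n h1 h2
    have hcv := hconv n (by omega)
    have hswap : conv eu (ahat (seriesInverse (eulerPoly N k) N k)) n ≡
        conv (ahat (eulerPoly N k)) (ahat (seriesInverse (eulerPoly N k) N k)) n [ZMOD k] := by
      apply conv_modeq _ _ _ _ _ ?_ (fun p _ => Int.ModEq.rfl)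
      intro p hp
      exact ((he.2 p (by omega)).2).symm
    refine hswap.trans (hcv.trans ?_)
    unfold dlt
    rw [if_neg (by omega)]
  · intro n h1 h2
    exact hcan n (by omega)


-- ---------- the scan and the doubling loop ----------
-- the abstract search: first n with Mfun k n = 0 (bounded by fuel)
def searchM (k : Int) : Nat → Nat → Nat
  | n, 0 => n
  | n, f+1 => if Mfun k n = 0 then n else searchM k (n + 1) f

theorem searchM_nozero (k : Int) :
    ∀ (f n : Nat), (∀ i, n ≤ i → i < n + f → Mfun k i ≠ 0) → searchM k n f = n + f := by
  intro f
  induction f with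
  | zero => intro n _; rfl
  | succ f IH =>
    intro n h
    rw [searchM, if_neg (h n le_rfl (by omega))]
    rw [IH (n + 1) (fun i h1 h2 => h i (by omega) (by omega))]
    omega

theorem searchM_zero (k : Int) :
    ∀ (f n n0 : Nat), n ≤ n0 → n0 < n + f → Mfun k n0 = 0 →
      (∀ i, n ≤ i → i < n0 → Mfun k i ≠ 0) → searchM k n f = n0 := by
  intro f
  induction f with
  | zero => intro n n0 h1 h2 _ _; omega
  | succ f IH =>
    intro n n0 h1 h2 h3 h4
    by_cases hn : n = n0
    · rw [searchM, hn, if_pos h3]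
    · rw [searchM, if_neg (h4 n le_rfl (by omega))]
      exact IH (n + 1) n0 (by omega) (by omega) h3 (fun i ha hb => h4 i (by omega) hb)

theorem altScan_none (inv : Array Int) :
    ∀ (r n : Nat), (∀ i, n ≤ i → i < n + r → inv.getD i 0 ≠ 0) → altScan inv n r = none := by
  intro r
  induction r with
  | zero => intro n _; rfl
  | succ r IH =>
    intro n h
    rw [altScan, if_neg (h n le_rfl (by omega))]
    exact IH (n + 1) (fun i h1 h2 => h i (by omega) (by omega))

theorem altScan_some (inv : Array Int) :
    ∀ (r n n0 : Nat), n ≤ n0 → n0 < n + r → inv.getD n0 0 = 0 →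
      (∀ i, n ≤ i → i < n0 → inv.getD i 0 ≠ 0) → altScan inv n r = some n0 := by
  intro r
  induction r with
  | zero => intro n n0 h1 h2 _ _; omega
  | succ r IH =>
    intro n n0 h1 h2 h3 h4
    by_cases hn : n = n0
    · rw [altScan, hn, if_pos h3]
    · rw [altScan, if_neg (h4 n le_rfl (by omega))]
      exact IH (n + 1) n0 (by omega) (by omega) h3 (fun i ha hb => h4 i (by omega) hb)

theorem altLoop_nozero (k : Int) (hk : k ≠ 0) :
    ∀ (f N2 : Nat), 1 ≤ N2 → (∀ i, 1 ≤ i → i ≤ N2 * 2 ^ f → Mfun k i ≠ 0) →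
      altLoop k (2 * N2) f = ((N2 * 2 ^ f : Nat) : Int) + 1 := by
  intro f
  induction f with
  | zero =>
    intro N2 h1 _
    rw [altLoop]
    norm_num
  | succ f IH =>
    intro N2 h1 hz
    have h2f : 1 ≤ 2 ^ f := Nat.one_le_two_pow
    have hle : 2 * N2 ≤ N2 * 2 ^ (f + 1) := by
      rw [pow_succ]
      calc 2 * N2 = N2 * 2 := by ring
        _ ≤ N2 * (2 ^ f * 2) := Nat.mul_le_mul_left N2 (by omega)
    have hvals := seriesInverse_vals (2 * N2) k hk
    have hscan : altScan (seriesInverse (eulerPoly (2 * N2) k) (2 * N2) k) 1 (2 * N2) = none := by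
      apply altScan_none
      intro i hi1 hi2
      rw [hvals i hi1 (by omega)]
      exact hz i hi1 (by omega)
    rw [altLoop]
    rw [hscan]
    have heq : N2 * 2 ^ (f + 1) = (2 * N2) * 2 ^ f := by rw [pow_succ]; ring
    rw [heq]
    exact IH (2 * N2) (by omega) (fun i ha hb => hz i ha (by rw [heq]; omega))

theorem altLoop_zero (k : Int) (hk : k ≠ 0) (n0 : Nat) (hn0 : Mfun k n0 = 0) (h1 : 1 ≤ n0)
    (hmin : ∀ i, 1 ≤ i → i < n0 → Mfun k i ≠ 0) :
    ∀ (f N2 : Nat), 1 ≤ N2 → 1 ≤ f → n0 ≤ N2 * 2 ^ f → altLoop k (2 * N2) f = (n0 : Int) := by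
  intro f
  induction f with
  | zero => intro N2 _ hf _; omega
  | succ f IH =>
    intro N2 hN2 _ hbound
    have h2f : 1 ≤ 2 ^ f := Nat.one_le_two_pow
    have hvals := seriesInverse_vals (2 * N2) k hk
    by_cases hle : n0 ≤ 2 * N2
    · have hscan : altScan (seriesInverse (eulerPoly (2 * N2) k) (2 * N2) k) 1 (2 * N2) = some n0 := by
        apply altScan_some _ _ _ _ h1 (by omega)
        · rw [hvals n0 h1 hle]; exact hn0
        · intro i ha hb
          rw [hvals i ha (by omega)]
          exact hmin i ha hb
      rw [altLoop, hscan]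
    · have hscan : altScan (seriesInverse (eulerPoly (2 * N2) k) (2 * N2) k) 1 (2 * N2) = none := by
        apply altScan_none
        intro i hi1 hi2
        rw [hvals i hi1 (by omega)]
        exact hmin i hi1 (by omega)
      rw [altLoop, hscan]
      have hf1 : 1 ≤ f := by
        by_contra hf0
        have : f = 0 := by omega
        subst this
        simp at hbound
        omega
      have heq : N2 * 2 ^ (f + 1) = (2 * N2) * 2 ^ f := by rw [pow_succ]; ring
      exact IH (2 * N2) (by omega) hf1 (by rw [heq] at hbound; omega)


-- ---------- port A's inner loop equals the twin-pair pentagonal loop ----------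
theorem pv_push_set_last (a : Array Int) (x v : Int) : (a.push x).set! a.size v = a.push v := by
  apply Array.ext
  · simp [Array.set!]
  · intro i h1 h2
    simp only [Array.size_push] at h2
    have hs : i < (a.push x).size := by simpa using h2
    simp only [Array.set!, Array.getElem_setIfInBounds hs, Array.getElem_push]
    split_ifs <;> first | rfl | omega

theorem pv_getD_push_last (a : Array Int) (x d : Int) : (a.push x).getD a.size d = x := by
  simp [Array.getD]

theorem pv_getD_push_lt (a : Array Int) (x d : Int) (i : Nat) (h : i < a.size) :
    (a.push x).getD i d = a.getD i d := by
  simp [Array.getD, h, Nat.lt_succ_of_lt h, Array.getElem_push_lt]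

-- A reduces mod k after every term, the twin loop once at the end: the two agree
theorem pv_mod_mod_add (a c k : Int) (hk : k ≠ 0) :
    PySem.Int.mod (PySem.Int.mod a k + c) k = PySem.Int.mod (a + c) k := by
  have h := PySem.Int.floordiv_mul_add_mod a k
  set q := PySem.Int.floordiv a k
  have hx : a + c = (PySem.Int.mod a k + c) + q * k := by linarith
  rw [hx, pv_mod_add_mul _ _ _ hk]

-- A's sign from i % 4 at i = 2j-2 / 2j-1 is the twin loop's sign from j % 2
theorem pv_signA1 (j : Int) :
    (if PySem.Int.mod (2 * j - 2) 4 > 1 then (-1 : Int) else 1)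
      = (if PySem.Int.mod j 2 = 1 then (1 : Int) else -1) := by
  rw [PySem.Int.mod_eq_emod_of_pos (a := 2 * j - 2) (by norm_num),
      PySem.Int.mod_eq_emod_of_pos (a := j) (by norm_num)]
  split_ifs <;> omega

theorem pv_signA2 (j : Int) :
    (if PySem.Int.mod (2 * j - 1) 4 > 1 then (-1 : Int) else 1)
      = (if PySem.Int.mod j 2 = 1 then (1 : Int) else -1) := by
  rw [PySem.Int.mod_eq_emod_of_pos (a := 2 * j - 1) (by norm_num),
      PySem.Int.mod_eq_emod_of_pos (a := j) (by norm_num)]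
  split_ifs <;> omega

theorem pv_fdiv_two_double (m : Int) : PySem.Int.floordiv (2 * m) 2 = m := by
  rw [PySem.Int.floordiv_eq_ediv_of_pos (by norm_num)]
  omega

theorem pv_fdiv_two_odd (j : Int) : PySem.Int.floordiv (2 * j - 1) 2 = j - 1 := by
  rw [PySem.Int.floordiv_eq_ediv_of_pos (by norm_num)]
  omega

theorem pv_mod_two_odd (j : Int) : PySem.Int.mod (2 * j - 1) 2 ≠ 0 := by
  rw [PySem.Int.mod_eq_emod_of_pos (by norm_num)]
  omega

theorem pv_mod_two_even (j : Int) : PySem.Int.mod (2 * j) 2 = 0 := by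
  rw [PySem.Int.mod_eq_emod_of_pos (by norm_num)]
  omega

-- proof-side reformulation of A's inner loop: pentagonal twin pairs g, g+j with a plain sum
def twinInner (n : Int) (mods : Array Int) (j g total : Int) : Nat → Int
  | 0 => total
  | fuel+1 =>
    if g ≤ n then
      let sign : Int := if PySem.Int.mod j 2 = 1 then 1 else -1
      let total1 := total + sign * mods.getD (n - g).toNat 0
      let total2 := if g + j ≤ n then total1 + sign * mods.getD (n - g - j).toNat 0 else total1
      twinInner n mods (j + 1) (g + 3 * j + 1) total2 fuel
    else total

-- the inner-loop bisimulation: A's slot-n accumulator is the twin loop's sum reduced mod k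
theorem pv_inner_eq (k n : Int) (hk : k ≠ 0) (hn : 1 ≤ n) :
    ∀ (fa fb : Nat) (j g acc total : Int) (mods : Array Int),
      1 ≤ j → 2 * g = j * (3 * j - 1) →
      n + 2 - g ≤ (fa : Int) → n + 2 - g ≤ (fb : Int) →
      mods.size = n.toNat →
      acc = PySem.Int.mod total k →
      pyInnerA k n (2 * j - 2) g (mods.push acc) fa
        = mods.push (PySem.Int.mod (twinInner n mods j g total fb) k) := by
  intro fa
  induction fa using Nat.strong_induction_on with
  | _ fa IH =>
  intro fb j g acc total mods hj hg hfa hfb hsz hacc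
  have hprod : (0:Int) ≤ (3*j+2)*(j-1) := mul_nonneg (by linarith) (by linarith)
  have hg1 : 1 ≤ g := by nlinarith [hprod, hg]
  by_cases hgn : g ≤ n
  · have hfa2 : 2 ≤ fa := by omega
    have hfb1 : 1 ≤ fb := by omega
    obtain ⟨fa2, rfl⟩ : ∃ m, fa = m + 1 + 1 := ⟨fa - 2, by omega⟩
    obtain ⟨fb1, rfl⟩ : ∃ m, fb = m + 1 := ⟨fb - 1, by omega⟩
    set x := mods.getD (n - g).toNat 0 with hx
    set s : Int := (if PySem.Int.mod j 2 = 1 then (1:Int) else -1) with hs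
    set y := mods.getD (n - g - j).toNat 0 with hy
    have eSetLast : ∀ v : Int, (mods.push acc).set! n.toNat v = mods.push v := by
      intro v; rw [← hsz]; exact pv_push_set_last mods acc v
    have eGetLast : (mods.push acc).getD n.toNat 0 = acc := by
      rw [← hsz]; exact pv_getD_push_last mods acc 0
    have eGetX : (mods.push acc).getD (n - g).toNat 0 = x := by
      rw [hx]; exact pv_getD_push_lt mods acc 0 _ (by omega)
    have hi1 : (2 * j - 2) + 1 = 2 * j - 1 := by ring
    have harg1 : -(j - 1 + 1) * (3 * -(j - 1 + 1) - 1) = 2 * (g + j) := by ring_nf; linarith [hg]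
    have stepA1 : pyInnerA k n (2 * j - 2) g (mods.push acc) (fa2 + 1 + 1)
        = pyInnerA k n (2 * j - 1) (g + j) (mods.push (PySem.Int.mod (acc + s * x) k)) (fa2 + 1) := by
      simp only [pyInnerA]
      rw [if_pos hgn, pv_signA1 j, ← hs, eGetLast, eGetX, eSetLast]
      rw [show ∀ v : Int, (mods.push (acc + s * x)).set! n.toNat v = mods.push v from
        fun v => by rw [← hsz]; exact pv_push_set_last _ _ v]
      rw [show (mods.push (acc + s * x)).getD n.toNat 0 = acc + s * x from by
        rw [← hsz]; exact pv_getD_push_last _ _ 0]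
      rw [hi1, if_neg (pv_mod_two_odd j), pv_fdiv_two_odd, harg1, pv_fdiv_two_double]
    set acc1m := PySem.Int.mod (acc + s * x) k with hacc1m
    have hacc1 : acc1m = PySem.Int.mod (total + s * x) k := by
      rw [hacc1m, hacc, pv_mod_mod_add _ _ _ hk]
    have stepB : twinInner n mods j g total (fb1 + 1)
        = twinInner n mods (j + 1) (g + 3 * j + 1)
            (if g + j ≤ n then total + s * x + s * y else total + s * x) fb1 := by
      simp only [twinInner]
      rw [if_pos hgn]
    rw [stepA1, stepB]
    by_cases hgjn : g + j ≤ n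
    · have hidx : n - (g + j) = n - g - j := by ring
      have hi2 : (2 * j - 1) + 1 = 2 * j := by ring
      have harg2 : (j + 1) * (3 * (j + 1) - 1) = 2 * (g + 3 * j + 1) := by ring_nf; linarith [hg]
      have stepA2 : pyInnerA k n (2 * j - 1) (g + j) (mods.push acc1m) (fa2 + 1)
          = pyInnerA k n (2 * j) (g + 3 * j + 1)
              (mods.push (PySem.Int.mod (acc1m + s * y) k)) fa2 := by
        simp only [pyInnerA]
        rw [if_pos hgjn, pv_signA2 j, ← hs]
        rw [show (mods.push acc1m).getD n.toNat 0 = acc1m from by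
          rw [← hsz]; exact pv_getD_push_last _ _ 0]
        rw [hidx]
        rw [show (mods.push acc1m).getD (n - g - j).toNat 0 = y from by
          rw [hy]; exact pv_getD_push_lt mods acc1m 0 _ (by omega)]
        rw [show ∀ v : Int, (mods.push acc1m).set! n.toNat v = mods.push v from
          fun v => by rw [← hsz]; exact pv_push_set_last _ _ v]
        rw [show ∀ v : Int, (mods.push (acc1m + s * y)).set! n.toNat v = mods.push v from
          fun v => by rw [← hsz]; exact pv_push_set_last _ _ v]
        rw [show (mods.push (acc1m + s * y)).getD n.toNat 0 = acc1m + s * y from by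
          rw [← hsz]; exact pv_getD_push_last _ _ 0]
        rw [hi2, if_pos (pv_mod_two_even j), pv_fdiv_two_double, harg2, pv_fdiv_two_double]
      rw [stepA2, if_pos hgjn]
      have hacc2 : PySem.Int.mod (acc1m + s * y) k = PySem.Int.mod (total + s * x + s * y) k := by
        rw [hacc1, pv_mod_mod_add _ _ _ hk]
      have hiter := IH fa2 (by omega) fb1 (j + 1) (g + 3 * j + 1)
        (PySem.Int.mod (acc1m + s * y) k) (total + s * x + s * y) mods
        (by linarith) (by linarith [hg, harg2]) (by push_cast at hfa ⊢; omega)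
        (by push_cast at hfb ⊢; omega) hsz hacc2
      rw [show 2 * (j + 1) - 2 = 2 * j from by ring] at hiter
      exact hiter
    · have stepA2 : pyInnerA k n (2 * j - 1) (g + j) (mods.push acc1m) (fa2 + 1)
          = mods.push acc1m := by
        simp only [pyInnerA]
        rw [if_neg hgjn]
      have stepB2 : twinInner n mods (j + 1) (g + 3 * j + 1) (total + s * x) fb1
          = total + s * x := by
        cases fb1 with
        | zero => rfl
        | succ m =>
          simp only [twinInner]
          rw [if_neg (by omega)]
      rw [stepA2, if_neg hgjn, stepB2, ← hacc1]
  · have hA : pyInnerA k n (2 * j - 2) g (mods.push acc) fa = mods.push acc := by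
      cases fa with
      | zero => rfl
      | succ m => simp only [pyInnerA]; rw [if_neg hgn]
    have hB : twinInner n mods j g total fb = total := by
      cases fb with
      | zero => rfl
      | succ m => simp only [twinInner]; rw [if_neg hgn]
    rw [hA, hB, ← hacc]


-- ---------- the twin loop computes the eu-convolution ----------
theorem sign_cast (jn : Nat) :
    (if PySem.Int.mod (jn : Int) 2 = 1 then (1:Int) else -1) = - esign jn := by
  have h : PySem.Int.mod (jn : Int) 2 = ((jn % 2 : Nat) : Int) := by
    exact_mod_cast PySem.Int.mod_natCast jn 2
  rw [h]
  unfold esign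
  rcases Nat.mod_two_eq_zero_or_one jn with h2 | h2 <;> simp [h2]

theorem twin_sum_zero (nn jn : Nat) (v1 v2 : Nat → Int) (hjn : 1 ≤ jn) (hg : nn < gp jn) :
    (∑ j ∈ Finset.Icc jn nn,
      (- esign j) * ((if gp j ≤ nn then v1 j else 0) + (if gp j + j ≤ nn then v2 j else 0))) = 0 := by
  apply Finset.sum_eq_zero
  intro j hj
  simp only [Finset.mem_Icc] at hj
  have hm := gp_mono jn j hjn hj.1
  rw [if_neg (by omega), if_neg (by omega)]
  ring

theorem twinInner_sum (nn : Nat) (mods : Array Int) (hnn : 1 ≤ nn) :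
    ∀ (fuel jn : Nat) (total : Int), 1 ≤ jn → nn + 2 ≤ fuel + gp jn →
      twinInner (nn : Int) mods (jn : Int) ((gp jn : Nat) : Int) total fuel
        = total + ∑ j ∈ Finset.Icc jn nn,
            (- esign j) * ((if gp j ≤ nn then mods.getD (nn - gp j) 0 else 0) +
                           (if gp j + j ≤ nn then mods.getD (nn - (gp j + j)) 0 else 0)) := by
  intro fuel
  induction fuel with
  | zero =>
    intro jn total hjn hfuel
    rw [show twinInner (nn : Int) mods (jn : Int) ((gp jn : Nat) : Int) total 0 = total from rfl]
    rw [twin_sum_zero nn jn _ _ hjn (by omega)]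
    ring
  | succ fuel IH =>
    intro jn total hjn hfuel
    by_cases hg : gp jn ≤ nn
    · have hgi : ((gp jn : Nat) : Int) ≤ (nn : Int) := by exact_mod_cast hg
      have hjnn : jn ≤ nn := le_trans (gp_ge_self jn hjn) hg
      have hstep : twinInner (nn : Int) mods (jn : Int) ((gp jn : Nat) : Int) total (fuel + 1)
          = twinInner (nn : Int) mods ((jn : Int) + 1) (((gp jn : Nat) : Int) + 3 * (jn : Int) + 1)
              (if ((gp jn : Nat) : Int) + (jn : Int) ≤ (nn : Int) then
                 total + (if PySem.Int.mod (jn : Int) 2 = 1 then (1:Int) else -1) *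
                     mods.getD ((nn : Int) - ((gp jn : Nat) : Int)).toNat 0
                   + (if PySem.Int.mod (jn : Int) 2 = 1 then (1:Int) else -1) *
                     mods.getD ((nn : Int) - ((gp jn : Nat) : Int) - (jn : Int)).toNat 0
               else total + (if PySem.Int.mod (jn : Int) 2 = 1 then (1:Int) else -1) *
                     mods.getD ((nn : Int) - ((gp jn : Nat) : Int)).toNat 0) fuel := by
        rw [twinInner]
        rw [if_pos hgi]
      rw [hstep]
      rw [sign_cast jn]
      rw [show ((nn : Int) - ((gp jn : Nat) : Int)).toNat = nn - gp jn from by omega]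
      rw [show ((nn : Int) - ((gp jn : Nat) : Int) - (jn : Int)).toNat = nn - (gp jn + jn) from by omega]
      have hnext1 : ((jn : Int) + 1) = ((jn + 1 : Nat) : Int) := by push_cast; ring
      have hnext2 : ((gp jn : Nat) : Int) + 3 * (jn : Int) + 1 = ((gp (jn + 1) : Nat) : Int) := by
        rw [gp_succ jn hjn]; push_cast; ring
      have hsplit : Finset.Icc jn nn = insert jn (Finset.Icc (jn + 1) nn) := by
        ext x
        simp only [Finset.mem_Icc, Finset.mem_insert]
        omega
      have hfnext : nn + 2 ≤ fuel + gp (jn + 1) := by have := gp_succ jn hjn; omega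
      by_cases htw : gp jn + jn ≤ nn
      · rw [if_pos (show ((gp jn : Nat) : Int) + (jn : Int) ≤ (nn : Int) from by exact_mod_cast htw)]
        rw [hnext1, hnext2, IH (jn + 1) _ (by omega) hfnext]
        rw [hsplit, Finset.sum_insert (by simp), if_pos hg, if_pos htw]
        ring
      · rw [if_neg (show ¬ (((gp jn : Nat) : Int) + (jn : Int) ≤ (nn : Int)) from by
          intro hcon
          exact htw (by exact_mod_cast hcon))]
        rw [hnext1, hnext2, IH (jn + 1) _ (by omega) hfnext]
        rw [hsplit, Finset.sum_insert (by simp), if_pos hg, if_neg htw]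
        ring
    · rw [twinInner, if_neg (by exact_mod_cast hg)]
      rw [twin_sum_zero nn jn _ _ hjn (by omega)]
      ring

-- reindexing: the twin-pair sum over pentagonal indices is the eu-convolution
theorem eu_ext (m nn : Nat) (h1 : 1 ≤ m) (hmn : m ≤ nn) :
    eu m = ∑ j ∈ Finset.Icc 1 nn,
      esign j * ((if gp j = m then 1 else 0) + (if gp j + j = m then 1 else 0)) := by
  unfold eu
  rw [if_neg (by omega), zero_add]
  apply Finset.sum_subset (Finset.Icc_subset_Icc le_rfl hmn)
  intro j hj hnj
  simp only [Finset.mem_Icc] at hj hnj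
  have hjm : m < j := by omega
  have hgj := gp_ge_self j (by omega)
  rw [if_neg (by omega), if_neg (by omega)]
  ring

theorem reindex (nn : Nat) (v : Nat → Int) (hnn : 1 ≤ nn) :
    (∑ j ∈ Finset.Icc 1 nn,
      (- esign j) * ((if gp j ≤ nn then v (nn - gp j) else 0) +
                     (if gp j + j ≤ nn then v (nn - (gp j + j)) else 0)))
    = - ∑ m ∈ Finset.Icc 1 nn, eu m * v (nn - m) := by
  have h1 : (∑ m ∈ Finset.Icc 1 nn, eu m * v (nn - m)) =
      ∑ m ∈ Finset.Icc 1 nn, ∑ j ∈ Finset.Icc 1 nn,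
        ((if gp j = m then esign j * v (nn - m) else 0) +
         (if gp j + j = m then esign j * v (nn - m) else 0)) := by
    apply Finset.sum_congr rfl
    intro m hm
    simp only [Finset.mem_Icc] at hm
    rw [eu_ext m nn hm.1 hm.2, Finset.sum_mul]
    apply Finset.sum_congr rfl
    intro j _
    split_ifs <;> ring
  have h2 : (∑ m ∈ Finset.Icc 1 nn, ∑ j ∈ Finset.Icc 1 nn,
        ((if gp j = m then esign j * v (nn - m) else 0) +
         (if gp j + j = m then esign j * v (nn - m) else 0))) =
      ∑ j ∈ Finset.Icc 1 nn,
        ((if gp j ≤ nn then esign j * v (nn - gp j) else 0) +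
         (if gp j + j ≤ nn then esign j * v (nn - (gp j + j)) else 0)) := by
    rw [Finset.sum_comm]
    apply Finset.sum_congr rfl
    intro j hj
    simp only [Finset.mem_Icc] at hj
    rw [Finset.sum_add_distrib]
    have hgj1 : 1 ≤ gp j := gp_ge_self j hj.1 |>.trans' hj.1
    congr 1
    · rw [Finset.sum_ite_eq (Finset.Icc 1 nn) (gp j) (fun m => esign j * v (nn - m))]
      simp only [Finset.mem_Icc]
      by_cases hc : gp j ≤ nn
      · rw [if_pos ⟨by omega, hc⟩, if_pos hc]
      · rw [if_neg (by omega), if_neg hc]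
    · rw [Finset.sum_ite_eq (Finset.Icc 1 nn) (gp j + j) (fun m => esign j * v (nn - m))]
      simp only [Finset.mem_Icc]
      by_cases hc : gp j + j ≤ nn
      · rw [if_pos ⟨by omega, hc⟩, if_pos hc]
      · rw [if_neg (by omega), if_neg hc]
  rw [h1, h2, ← Finset.sum_neg_distrib]
  apply Finset.sum_congr rfl
  intro j _
  split_ifs <;> ring

-- the value A appends at step nn is exactly Mfun k nn
theorem twinInner_eq_Mfun (k : Int) (hk : k ≠ 0) (nn : Nat) (hnn : 1 ≤ nn) (mods : Array Int)
    (hvals : ∀ i, i < nn → mods.getD i 0 = Mfun k i) :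
    PySem.Int.mod (twinInner (nn : Int) mods 1 1 0 (nn + 1)) k = Mfun k nn := by
  have hg1 : gp 1 = 1 := rfl
  have hrun := twinInner_sum nn mods hnn (nn + 1) 1 0 le_rfl (by rw [hg1])
  rw [hg1] at hrun
  norm_cast at hrun
  rw [zero_add] at hrun
  rw [hrun]
  have hsum : (∑ j ∈ Finset.Icc 1 nn,
      (- esign j) * ((if gp j ≤ nn then mods.getD (nn - gp j) 0 else 0) +
                     (if gp j + j ≤ nn then mods.getD (nn - (gp j + j)) 0 else 0))) =
      ∑ j ∈ Finset.Icc 1 nn,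
      (- esign j) * ((if gp j ≤ nn then Mfun k (nn - gp j) else 0) +
                     (if gp j + j ≤ nn then Mfun k (nn - (gp j + j)) else 0)) := by
    apply Finset.sum_congr rfl
    intro j hj
    simp only [Finset.mem_Icc] at hj
    have hgj1 : 1 ≤ gp j := le_trans hj.1 (gp_ge_self j hj.1)
    congr 1
    congr 1
    · by_cases hc : gp j ≤ nn
      · rw [if_pos hc, if_pos hc, hvals _ (by omega)]
      · rw [if_neg hc, if_neg hc]
    · by_cases hc : gp j + j ≤ nn
      · rw [if_pos hc, if_pos hc, hvals _ (by omega)]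
      · rw [if_neg hc, if_neg hc]
  rw [hsum, reindex nn (Mfun k) hnn]
  obtain ⟨m, rfl⟩ : ∃ m, nn = m + 1 := ⟨nn - 1, by omega⟩
  rw [Mfun_succ]

-- ---------- port A equals the abstract search ----------
theorem pyOuter_searchM (k : Int) (hk : k ≠ 0) :
    ∀ (fuel nn : Nat) (mods : Array Int), 1 ≤ nn → mods.size = nn →
      (∀ i, i < nn → mods.getD i 0 = Mfun k i) →
      pyOuterA k (nn : Int) mods fuel = ((searchM k nn fuel : Nat) : Int) := by
  intro fuel
  induction fuel with
  | zero =>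
    intro nn mods _ _ _
    rfl
  | succ fuel IH =>
    intro nn mods hnn hsz hvals
    have hzero : (0:Int) = PySem.Int.mod 0 k := ((pv_canon_zero k hk) : PySem.Int.mod 0 k = 0).symm
    have hinner := pv_inner_eq k (nn : Int) hk (by exact_mod_cast hnn)
      ((nn : Int).toNat + 1) ((nn : Int).toNat + 1) 1 1 0 0 mods
      le_rfl (by norm_num) (by omega) (by omega) (by omega) hzero
    rw [show (2 * (1:Int) - 2) = 0 from by norm_num] at hinner
    have htn : (nn : Int).toNat = nn := by omega
    have hpush : pyInnerA k (nn : Int) 0 1 (mods.push 0) ((nn : Int).toNat + 1)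
        = mods.push (Mfun k nn) := by
      rw [hinner]
      congr 1
      rw [htn]
      exact twinInner_eq_Mfun k hk nn hnn mods hvals
    rw [pyOuterA, hpush]
    have hlast : (mods.push (Mfun k nn)).getD (nn : Int).toNat 0 = Mfun k nn := by
      rw [htn, ← hsz]
      exact pv_getD_push_last mods _ 0
    rw [hlast]
    by_cases hz : Mfun k nn = 0
    · rw [if_pos hz, searchM, if_pos hz]
    · rw [if_neg hz, searchM, if_neg hz]
      rw [show (nn : Int) + 1 = ((nn + 1 : Nat) : Int) from by push_cast; ring]
      apply IH (nn + 1) _ (by omega) (by rw [Array.size_push, hsz])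
      intro i hi
      by_cases hi2 : i < nn
      · rw [← hsz] at hi2
        rw [pv_getD_push_lt mods _ 0 i hi2]
        exact hvals i (by omega)
      · have : i = nn := by omega
        subst this
        rw [← hsz]
        exact pv_getD_push_last mods _ 0

-- ===== VERDICT (by name: the statement is the Claim_ definition above) =====
theorem find_coin_partitions_spec : Claim_equal_find_coin_partitions := by
  intro k _ hk
  unfold Spec_find_coin_partitions find_coin_partitions find_coin_partitions_alt
  have hA : pyOuterA k 1 #[1] 16777216 = ((searchM k 1 16777216 : Nat) : Int) := by
    have h := pyOuter_searchM k hk 16777216 1 #[1] le_rfl rfl (fun i hi => by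
      have h0 : i = 0 := by omega
      subst h0
      rfl)
    simpa using h
  have hB16 : altLoop k 16 21 = altLoop k (2 * 8) 21 := rfl
  by_cases hex : ∃ n0, 1 ≤ n0 ∧ n0 ≤ 16777216 ∧ Mfun k n0 = 0
  · obtain ⟨n0', hn1', hn2', hn3'⟩ := hex
    have hexist : ∃ n, 1 ≤ n ∧ Mfun k n = 0 := ⟨n0', hn1', hn3'⟩
    obtain ⟨hge1, hzero⟩ := Nat.find_spec hexist
    have hle : Nat.find hexist ≤ n0' := Nat.find_min' hexist ⟨hn1', hn3'⟩
    have hmin : ∀ i, 1 ≤ i → i < Nat.find hexist → Mfun k i ≠ 0 := by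
      intro i h1 h2 hcon
      exact (Nat.find_min hexist h2) ⟨h1, hcon⟩
    have hsA : searchM k 1 16777216 = Nat.find hexist :=
      searchM_zero k 16777216 1 (Nat.find hexist) hge1 (by omega) hzero
        (fun i ha hb => hmin i ha hb)
    have hBv : altLoop k (2 * 8) 21 = ((Nat.find hexist : Nat) : Int) :=
      altLoop_zero k hk (Nat.find hexist) hzero hge1 hmin 21 8 (by norm_num) (by norm_num)
        (by
          have he : (8 * 2 ^ 21 : Nat) = 16777216 := by norm_num
          omega)
    rw [hA, hsA, hB16, hBv]
  · have hno : ∀ i, 1 ≤ i → i ≤ 16777216 → Mfun k i ≠ 0 := by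
      intro i h1 h2 hcon
      exact hex ⟨i, h1, h2, hcon⟩
    have hsA : searchM k 1 16777216 = 1 + 16777216 :=
      searchM_nozero k 16777216 1 (fun i ha hb => hno i ha (by omega))
    have hBv : altLoop k (2 * 8) 21 = ((8 * 2 ^ 21 : Nat) : Int) + 1 :=
      altLoop_nozero k hk 21 8 (by norm_num) (fun i ha hb => hno i ha (by
        have he : (8 * 2 ^ 21 : Nat) = 16777216 := by norm_num
        omega))
    rw [hA, hsA, hB16, hBv]
    norm_num
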